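-- pv_equiv track=rewrite | github.com/dimistsaousis/coursera | Algorithms & Data Structures Specialisation/Algorithms on Graphs/Week2-Graph Decomposition part 2/3_strongly_connected.py | number_of_strongly_connected_components
-- ===== SOURCE A (Python) =====
-- def dfs_with_order(adj_array, used, order, x, clock):
--     used[x] = 1
--     clock += 1
--     for w in adj_array[x]:
--         if used[w] == 0:
--             used, order, clock = dfs_with_order(adj_array, used, order, w, clock)
--     order[x] = clock
--     clock += 1
--     return used, order, clock
--
-- def dfs(adj, used, x):
--     used[x] = 1
--     for w in adj[x]:
--         if used[w] == 0:
--             used = dfs(adj, used, w)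
--     return used
--
-- def topological_sort(adj_array):
--     n = len(adj_array)
--     used = [0] * n
--     order = [0] * n
--     clock = 1
--     for i in range(n):
--         if used[i] == 0:
--             used, order, clock = dfs_with_order(adj_array, used, order, i, clock)
--     idx = [i for i in range(n)]
--     return sorted(idx, key=lambda k: order[k], reverse=True)
--
-- def number_of_strongly_connected_components(adj_array, adj_reverse):
--     n = len(adj_array)
--     used = [0] * n
--     result = 0
--     idx = topological_sort(adj_reverse)
--     for i in idx:
--         if used[i] == 0:
--             result += 1
--             used = dfs(adj_array, used, i)
--     return result
-- ===== SOURCE B (Python) =====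
-- def _iter_dfs(adj, seen, s, out):
--     # explicit-stack DFS: frames are (node, next-child-index); appends finish order to out
--     seen[s] = 1
--     stack = [(s, 0)]
--     while stack:
--         x, k = stack.pop()
--         row = adj[x]
--         while k < len(row) and seen[row[k]] != 0:
--             k += 1
--         if k < len(row):
--             w = row[k]
--             stack.append((x, k + 1))
--             seen[w] = 1
--             stack.append((w, 0))
--         else:
--             out.append(x)
--
--
-- def number_of_strongly_connected_components(adj_array, adj_reverse):
--     # Iterative Kosaraju: explicit-stack DFS builds the finish order directly
--     # (no clock array, no sort, no recursion), then the finish order is walked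
--     # backwards, counting explicit-stack DFS trees on the forward graph.
--     n = len(adj_reverse)
--     visited = [0] * n
--     post = []
--     for s in range(n):
--         if visited[s] == 0:
--             _iter_dfs(adj_reverse, visited, s, post)
--     m = len(adj_array)
--     marked = [0] * m
--     count = 0
--     for i in range(len(post) - 1, -1, -1):
--         s = post[i]
--         if marked[s] == 0:
--             count += 1
--             _iter_dfs(adj_array, marked, s, [])
--     return count
-- ===== Notes on version B (the rewrite author's own statement) =====
-- stated objective: alternative
-- what changed: Replaces A's recursive clock/order-array Kosaraju with its O(n log n) key-sort of the indices by an iterative one: both passes run an explicit stack of (node, next-child-index) frames, the first pass appends finished nodes to a post-order list that is walked backwards in the second pass, so there is no recursion, no clock array and no sort.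
-- outside the precondition, e.g. on number_of_strongly_connected_components([[2], [], [0]], [[-1], []]): A returns 2, B returns 1; on number_of_strongly_connected_components([[], [0, 0, 0], [3], [8, 8]], [[]]): A returns 1, B returns 1; on number_of_strongly_connected_components([[0]], [[0], [0]]): A raises IndexError, B raises IndexError
import Mathlib
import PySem

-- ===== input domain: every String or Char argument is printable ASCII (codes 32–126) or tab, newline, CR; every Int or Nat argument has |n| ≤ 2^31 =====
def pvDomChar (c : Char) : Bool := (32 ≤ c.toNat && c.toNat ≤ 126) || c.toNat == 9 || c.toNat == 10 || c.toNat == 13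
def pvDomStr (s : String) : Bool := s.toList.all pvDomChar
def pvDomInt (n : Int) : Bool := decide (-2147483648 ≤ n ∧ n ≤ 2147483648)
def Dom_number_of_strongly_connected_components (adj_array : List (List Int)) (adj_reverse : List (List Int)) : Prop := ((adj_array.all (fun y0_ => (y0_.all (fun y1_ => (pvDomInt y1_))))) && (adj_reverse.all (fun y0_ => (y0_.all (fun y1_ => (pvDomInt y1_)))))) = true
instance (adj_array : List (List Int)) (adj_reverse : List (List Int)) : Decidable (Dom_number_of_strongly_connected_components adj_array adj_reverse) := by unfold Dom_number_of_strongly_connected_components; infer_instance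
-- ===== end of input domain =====

-- B replaces A's recursive clock/order/sort Kosaraju by an iterative one: explicit stacks of
-- (node, next-child-index) frames build the finish order directly, which is walked backwards
-- (same return value; neither version mutates its arguments' rows).

-- ===== PORT A =====
-- dfs_with_order: recursion ported with a fuel argument (n+1 at every top-level call is
-- more than Python's recursion ever nests within one call: depth ≤ number of unmarked nodes).
def dfsW (adj : List (List Int)) : Nat → List Int → List Int → Int → Int → List Int × List Int × Int
  | 0, used, order, _x, clock => (used, order, clock)
  | fuel+1, used, order, x, clock =>
    let st := (PySem.List.pyGetD adj x []).foldl
      (fun (st : List Int × List Int × Int) w =>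
        if PySem.List.pyGetD st.1 w 0 == 0 then dfsW adj fuel st.1 st.2.1 w st.2.2 else st)
      (PySem.List.pySetD used x 1, order, clock + 1)
    (st.1, PySem.List.pySetD st.2.1 x st.2.2, st.2.2 + 1)

def dfsA (adj : List (List Int)) : Nat → List Int → Int → List Int
  | 0, used, _x => used
  | fuel+1, used, x =>
    (PySem.List.pyGetD adj x []).foldl
      (fun u w => if PySem.List.pyGetD u w 0 == 0 then dfsA adj fuel u w else u)
      (PySem.List.pySetD used x 1)

def topological_sort (adj : List (List Int)) : List Int :=
  let n := adj.length
  let st := (PySem.List.pyRange 0 (n : Int)).foldl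
    (fun (st : List Int × List Int × Int) i =>
      if PySem.List.pyGetD st.1 i 0 == 0 then dfsW adj (n+1) st.1 st.2.1 i st.2.2 else st)
    (List.replicate n 0, List.replicate n 0, 1)
  PySem.List.sorted (PySem.List.pyRange 0 (n : Int)) (fun k => PySem.List.pyGetD st.2.1 k 0) true

def number_of_strongly_connected_components (adj_array : List (List Int)) (adj_reverse : List (List Int)) : Int :=
  let n := adj_array.length
  let idx := topological_sort adj_reverse
  let st := idx.foldl
    (fun (st : List Int × Int) i =>
      if PySem.List.pyGetD st.1 i 0 == 0 then (dfsA adj_array (n+1) st.1 i, st.2 + 1) else st)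
    (List.replicate n 0, 0)
  st.2

-- ===== PORT B =====
-- the inner `while k < len(row) and seen[row[k]] != 0: k += 1` loop of _iter_dfs
-- (fuel row.length+1 is an upper bound on its iteration count)
def skipSeen (seen row : List Int) : Int → Nat → Int
  | k, 0 => k
  | k, f+1 =>
    if k < (row.length : Int) ∧ PySem.List.pyGetD seen (PySem.List.pyGetD row k 0) 0 ≠ 0 then
      skipSeen seen row (k+1) f
    else k

-- the `while stack:` loop of _iter_dfs; one fuel unit per iteration (each iteration either
-- marks a fresh node or pops a frame, so 2n+1 fuel at the call sites is an upper bound)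
def iterDFS (adj : List (List Int)) : Nat → List Int → List Int → List (Int × Int) → List Int × List Int
  | 0, seen, out, _ => (seen, out)
  | _+1, seen, out, [] => (seen, out)
  | fuel+1, seen, out, (x, k) :: rest =>
    let row := PySem.List.pyGetD adj x []
    let k' := skipSeen seen row k (row.length + 1)
    if k' < (row.length : Int) then
      let w := PySem.List.pyGetD row k' 0
      iterDFS adj fuel (PySem.List.pySetD seen w 1) out ((w, 0) :: (x, k' + 1) :: rest)
    else
      iterDFS adj fuel seen (out ++ [x]) rest

def number_of_strongly_connected_components_alt (adj_array : List (List Int)) (adj_reverse : List (List Int)) : Int :=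
  let n := adj_reverse.length
  let fp := (PySem.List.pyRange 0 (n : Int)).foldl
    (fun (st : List Int × List Int) s =>
      if PySem.List.pyGetD st.1 s 0 == 0 then
        iterDFS adj_reverse (2*n+1) (PySem.List.pySetD st.1 s 1) st.2 [(s, 0)]
      else st)
    (List.replicate n 0, [])
  let m := adj_array.length
  let sp := fp.2.reverse.foldl
    (fun (st : List Int × Int) s =>
      if PySem.List.pyGetD st.1 s 0 == 0 then
        ((iterDFS adj_array (2*m+1) (PySem.List.pySetD st.1 s 1) [] [(s, 0)]).1, st.2 + 1)
      else st)
    (List.replicate m 0, 0)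
  sp.2

-- ===== PRECONDITION & SPEC =====
-- Pre_ admits the natural domain, in two shapes: (i) reverse edges are valid non-negative
-- vertices, there are no more reverse rows than forward rows, and (unless the reverse graph is
-- empty, when the loop never touches adj_array) forward edges are in Python's indexable range;
-- (ii) both graphs have the same number of rows and all edges are in Python's indexable range
-- [-n, n), where negative labels wrap to the same vertex in both passes.  It excludes inputs
-- where A raises IndexError, plus two kinds of malformed returning inputs: graphs whose only
-- out-of-range forward rows happen to be unreachable, and negative reverse edges combined with
-- unequal lengths, where Python's negative-index wraparound resolves the same label to
-- different vertices in the two passes and no answer is canonical.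
def Pre_number_of_strongly_connected_components (adj_array : List (List Int)) (adj_reverse : List (List Int)) : Prop :=
  (adj_reverse.length ≤ adj_array.length ∧
    (∀ row ∈ adj_reverse, ∀ w ∈ row, 0 ≤ w ∧ w < (adj_reverse.length : Int)) ∧
    (adj_reverse.length = 0 ∨
      ∀ row ∈ adj_array, ∀ w ∈ row, -(adj_array.length : Int) ≤ w ∧ w < (adj_array.length : Int))) ∨
  (adj_reverse.length = adj_array.length ∧
    (∀ row ∈ adj_reverse, ∀ w ∈ row, -(adj_reverse.length : Int) ≤ w ∧ w < (adj_reverse.length : Int)) ∧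
    (∀ row ∈ adj_array, ∀ w ∈ row, -(adj_array.length : Int) ≤ w ∧ w < (adj_array.length : Int)))
instance (adj_array : List (List Int)) (adj_reverse : List (List Int)) : Decidable (Pre_number_of_strongly_connected_components adj_array adj_reverse) := by unfold Pre_number_of_strongly_connected_components; infer_instance

def pvWitness_number_of_strongly_connected_components : List (List Int) × List (List Int) := ([[1], [0]], [[1], [0]])

def Spec_number_of_strongly_connected_components (adj_array : List (List Int)) (adj_reverse : List (List Int)) (out : Int) : Prop := out = number_of_strongly_connected_components_alt adj_array adj_reverse
instance (adj_array : List (List Int)) (adj_reverse : List (List Int)) (out : Int) : Decidable (Spec_number_of_strongly_connected_components adj_array adj_reverse out) := by unfold Spec_number_of_strongly_connected_components; infer_instance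

-- ===== CLAIM (what is proved, stated in full; the proofs are below) =====
def Claim_equal_number_of_strongly_connected_components : Prop := ∀ (adj_array : List (List Int)) (adj_reverse : List (List Int)), Dom_number_of_strongly_connected_components adj_array adj_reverse → Pre_number_of_strongly_connected_components adj_array adj_reverse → Spec_number_of_strongly_connected_components adj_array adj_reverse (number_of_strongly_connected_components adj_array adj_reverse)

-- ===== LEMMAS AND PROOFS =====

-- Proof-side recursive reference implementation (Kosaraju with a recursive post-order DFS):
-- the proof shows A = nsccRec (coupling A's clock/order/sort pass with a post-order list)
-- and nsccRec = B's port (coupling the recursion with B's explicit stack machine).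
def dfsPost (adj : List (List Int)) : Nat → List Int → List Int → Int → List Int × List Int
  | 0, visited, post, _x => (visited, post)
  | fuel+1, visited, post, x =>
    let st := (PySem.List.pyGetD adj x []).foldl
      (fun (st : List Int × List Int) w =>
        if PySem.List.pyGetD st.1 w 0 == 0 then dfsPost adj fuel st.1 st.2 w else st)
      (PySem.List.pySetD visited x 1, post)
    (st.1, st.2 ++ [x])

def dfsMark (adj : List (List Int)) : Nat → List Int → Int → List Int
  | 0, m, _x => m
  | fuel+1, m, x =>
    (PySem.List.pyGetD adj x []).foldl
      (fun u w => if PySem.List.pyGetD u w 0 == 0 then dfsMark adj fuel u w else u)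
      (PySem.List.pySetD m x 1)

def nsccRec (adj_array : List (List Int)) (adj_reverse : List (List Int)) : Int :=
  let nr := adj_reverse.length
  let fp := (PySem.List.pyRange 0 (nr : Int)).foldl
    (fun (st : List Int × List Int) i =>
      if PySem.List.pyGetD st.1 i 0 == 0 then dfsPost adj_reverse (nr+1) st.1 st.2 i else st)
    (List.replicate nr 0, [])
  let na := adj_array.length
  let sp := fp.2.reverse.foldl
    (fun (st : List Int × Int) i =>
      if PySem.List.pyGetD st.1 i 0 == 0 then (dfsMark adj_array (na+1) st.1 i, st.2 + 1) else st)
    (List.replicate na 0, 0)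
  sp.2

-- The second-pass helpers of A and of the recursive reference compute the same marking.
theorem dfsA_eq_dfsMark (adj : List (List Int)) :
    ∀ (fuel : Nat) (used : List Int) (x : Int), dfsA adj fuel used x = dfsMark adj fuel used x := by
  intro fuel
  induction fuel with
  | zero => intro used x; rfl
  | succ f ih =>
    intro used x
    simp only [dfsA, dfsMark]
    apply List.foldl_ext
    intro u w _
    by_cases h : PySem.List.pyGetD u w 0 == 0 <;> simp [h, ih]

-- Shared shape of the conclusions of the first-pass coupling lemmas: relates the result of
-- A's dfs_with_order (W) and the reference explore (P) run from common state (used, order/post,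
-- clock); L is the list of newly finished vertices, in finish order.
def CoupleRes (adj : List (List Int)) (used order post : List Int) (clock : Int)
    (W : List Int × List Int × Int) (P : List Int × List Int) (L : List Int) : Prop :=
  P.1 = W.1 ∧
  P.2 = post ++ L ∧
  L.Nodup ∧
  (∀ k ∈ L, 0 ≤ k ∧ k < (adj.length : Int) ∧ PySem.List.pyGetD used k 0 = 0) ∧
  (∀ j : Int, 0 ≤ j → PySem.List.pyGetD W.1 j 0 = if j ∈ L then 1 else PySem.List.pyGetD used j 0) ∧
  W.1.length = used.length ∧
  W.2.1.length = order.length ∧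
  W.2.2 = clock + 2 * L.length ∧
  (∀ j : Int, 0 ≤ j → j ∉ L → PySem.List.pyGetD W.2.1 j 0 = PySem.List.pyGetD order j 0) ∧
  L.Pairwise (fun a b => PySem.List.pyGetD W.2.1 a 0 < PySem.List.pyGetD W.2.1 b 0) ∧
  (∀ k ∈ L, clock < PySem.List.pyGetD W.2.1 k 0 ∧ PySem.List.pyGetD W.2.1 k 0 < W.2.2) ∧
  W.1.count 0 ≤ used.count 0


-- small indexing utilities (all indices involved are non-negative ints)
theorem pyGetD_pySetD_int (xs : List Int) (x j v : Int) (hx : 0 ≤ x) (hj : 0 ≤ j)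
    (hlt : x.toNat < xs.length) :
    PySem.List.pyGetD (PySem.List.pySetD xs x v) j 0 =
      if j = x then v else PySem.List.pyGetD xs j 0 := by
  have hx' : ((x.toNat : Nat) : Int) = x := Int.toNat_of_nonneg hx
  have hj' : ((j.toNat : Nat) : Int) = j := Int.toNat_of_nonneg hj
  rw [← hx', ← hj', PySem.List.pyGetD_pySetD_natCast xs x.toNat j.toNat v 0 hlt]
  have hiff : j.toNat = x.toNat ↔ (j.toNat : Int) = (x.toNat : Int) := by omega
  rw [if_congr hiff rfl rfl]

theorem pyGetD_nonneg_eq_getElem (xs : List Int) (j : Int) (hj : 0 ≤ j) (h : j.toNat < xs.length) :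
    PySem.List.pyGetD xs j 0 = xs[j.toNat] := by
  rw [PySem.List.pyGetD_of_nonneg _ _ hj, List.getD_eq_getElem _ _ h]

theorem count_after_set (used : List Int) (x : Int) (hx : 0 ≤ x) (hlt : x.toNat < used.length)
    (h0 : PySem.List.pyGetD used x 0 = 0) :
    (PySem.List.pySetD used x 1).count 0 + 1 = used.count 0 := by
  rw [pyGetD_nonneg_eq_getElem used x hx hlt] at h0
  have hpos : 1 ≤ used.count 0 := List.count_pos_iff.mpr (h0 ▸ List.getElem_mem hlt)
  rw [PySem.List.pySetD_of_nonneg _ _ hx, List.count_set hlt]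
  simp [h0]
  omega

theorem pyGetD_replicate (N : Nat) (j : Int) (hj : 0 ≤ j) :
    PySem.List.pyGetD (List.replicate N (0 : Int)) j 0 = 0 := by
  rw [PySem.List.pyGetD_of_nonneg _ _ hj]
  rcases lt_or_ge j.toNat N with h | h
  · rw [List.getD_eq_getElem _ _ (by simpa using h)]; simp
  · rw [List.getD_eq_default _ _ (by simpa using h)]

theorem couple_trans (adj : List (List Int)) (used order post : List Int) (clock : Int)
    (W1 W2 : List Int × List Int × Int) (P1 P2 : List Int × List Int) (L1 L2 : List Int)
    (h1 : CoupleRes adj used order post clock W1 P1 L1)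
    (h2 : CoupleRes adj W1.1 W1.2.1 (post ++ L1) W1.2.2 W2 P2 L2) :
    CoupleRes adj used order post clock W2 P2 (L1 ++ L2) := by
  obtain ⟨_e1, _e2, nd1, fresh1, char1, lu1, lo1, ck1, opres1, pw1, bnd1, cnt1⟩ := h1
  obtain ⟨f1, f2, nd2, fresh2, char2, lu2, lo2, ck2, opres2, pw2, bnd2, cnt2⟩ := h2
  have hdisj : ∀ k ∈ L2, k ∉ L1 := by
    intro k hk2 hk1
    obtain ⟨hk0, _, hz⟩ := fresh2 k hk2
    rw [char1 k hk0, if_pos hk1] at hz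
    exact absurd hz (by norm_num)
  have hfreshL2 : ∀ k ∈ L2, 0 ≤ k ∧ k < (adj.length : Int) ∧ PySem.List.pyGetD used k 0 = 0 := by
    intro k hk2
    obtain ⟨hk0, hklt, hz⟩ := fresh2 k hk2
    refine ⟨hk0, hklt, ?_⟩
    rw [char1 k hk0, if_neg (hdisj k hk2)] at hz
    exact hz
  refine ⟨f1, ?_, ?_, ?_, ?_, lu2.trans lu1, lo2.trans lo1, ?_, ?_, ?_, ?_, cnt2.trans cnt1⟩
  · rw [f2, List.append_assoc]
  · rw [List.nodup_append]
    exact ⟨nd1, nd2, fun a ha b hb hab => hdisj b hb (hab ▸ ha)⟩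
  · intro k hk
    rcases List.mem_append.mp hk with hk1 | hk2
    · exact fresh1 k hk1
    · exact hfreshL2 k hk2
  · intro j hj
    rw [char2 j hj, char1 j hj]
    by_cases hj2 : j ∈ L2
    · simp [hj2]
    · by_cases hj1 : j ∈ L1 <;> simp [hj1, hj2]
  · rw [ck2, ck1, List.length_append]
    push_cast
    ring
  · intro j hj hjn
    rw [opres2 j hj (fun h => hjn (List.mem_append.mpr (Or.inr h))),
        opres1 j hj (fun h => hjn (List.mem_append.mpr (Or.inl h)))]
  · rw [List.pairwise_append]
    have hpres : ∀ a ∈ L1, PySem.List.pyGetD W2.2.1 a 0 = PySem.List.pyGetD W1.2.1 a 0 := by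
      intro a ha
      exact opres2 a (fresh1 a ha).1 (fun h => hdisj a h ha)
    refine ⟨pw1.imp_of_mem ?_, pw2, ?_⟩
    · intro a b ha hb hab
      rw [hpres a ha, hpres b hb]; exact hab
    · intro a ha b hb
      rw [hpres a ha]
      calc PySem.List.pyGetD W1.2.1 a 0 < W1.2.2 := (bnd1 a ha).2
        _ < PySem.List.pyGetD W2.2.1 b 0 := (bnd2 b hb).1
  · intro k hk
    have hmono : W1.2.2 ≤ W2.2.2 := by rw [ck2]; omega
    have hclk : clock ≤ W1.2.2 := by rw [ck1]; omega
    rcases List.mem_append.mp hk with hk1 | hk2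
    · have := bnd1 k hk1
      rw [opres2 k (fresh1 k hk1).1 (fun h => hdisj k h hk1)]
      exact ⟨this.1, lt_of_lt_of_le this.2 hmono⟩
    · have := bnd2 k hk2
      exact ⟨lt_of_le_of_lt hclk this.1, this.2⟩

def Good (adj : List (List Int)) : Prop :=
  ∀ row ∈ adj, ∀ w ∈ row, 0 ≤ w ∧ w < (adj.length : Int)

def MainStmt (adj : List (List Int)) (fuel : Nat) : Prop :=
  ∀ (used order post : List Int) (x clock : Int),
    Good adj → used.length = adj.length → order.length = adj.length →
    0 ≤ x → x < (adj.length : Int) →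
    PySem.List.pyGetD used x 0 = 0 →
    used.count 0 < fuel →
    ∃ L, x ∈ L ∧ CoupleRes adj used order post clock
      (dfsW adj fuel used order x clock) (dfsPost adj fuel used post x) L

theorem loop_couple (adj : List (List Int)) (fuel : Nat) (IH : MainStmt adj fuel) :
    ∀ (ws : List Int) (used order post : List Int) (clock : Int),
    Good adj → used.length = adj.length → order.length = adj.length →
    (∀ w ∈ ws, 0 ≤ w ∧ w < (adj.length : Int)) →
    used.count 0 < fuel →
    ∃ L, CoupleRes adj used order post clock
      (ws.foldl (fun (st : List Int × List Int × Int) w =>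
          if PySem.List.pyGetD st.1 w 0 == 0 then dfsW adj fuel st.1 st.2.1 w st.2.2 else st)
        (used, order, clock))
      (ws.foldl (fun (st : List Int × List Int) w =>
          if PySem.List.pyGetD st.1 w 0 == 0 then dfsPost adj fuel st.1 st.2 w else st)
        (used, post))
      L := by
  intro ws
  induction ws with
  | nil =>
    intro used order post clock _hG _hu _ho _hws _hf
    exact ⟨[], rfl, by simp, by simp, by simp, fun j _ => by simp, rfl, rfl, by simp,
      fun j _ _ => rfl, by simp, by simp, le_refl _⟩
  | cons w ws ihw =>
    intro used order post clock hG hu ho hws hf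
    obtain ⟨hw0, hwlt⟩ := hws w (by simp)
    have hws' : ∀ v ∈ ws, 0 ≤ v ∧ v < (adj.length : Int) := fun v hv => hws v (by simp [hv])
    simp only [List.foldl_cons]
    by_cases hg : PySem.List.pyGetD used w 0 = 0
    · have hgb : (PySem.List.pyGetD ((used, order, clock) : List Int × List Int × Int).1 w 0 == 0) = true := by
        simpa using hg
      have hgb' : (PySem.List.pyGetD ((used, post) : List Int × List Int).1 w 0 == 0) = true := by
        simpa using hg
      rw [if_pos hgb, if_pos hgb']
      obtain ⟨L1, _hxL1, hc1⟩ := IH used order post w clock hG hu ho hw0 hwlt hg hf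
      obtain ⟨e1, e2, _⟩ := id hc1
      have hP1 : dfsPost adj fuel used post w =
          ((dfsW adj fuel used order w clock).1, post ++ L1) := Prod.ext e1 e2
      rw [hP1]
      have hlu : (dfsW adj fuel used order w clock).1.length = adj.length := by
        rw [hc1.2.2.2.2.2.1, hu]
      have hlo : (dfsW adj fuel used order w clock).2.1.length = adj.length := by
        rw [hc1.2.2.2.2.2.2.1, ho]
      have hcnt : (dfsW adj fuel used order w clock).1.count 0 < fuel :=
        lt_of_le_of_lt hc1.2.2.2.2.2.2.2.2.2.2.2 hf
      obtain ⟨L2, hc2⟩ := ihw (dfsW adj fuel used order w clock).1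
        (dfsW adj fuel used order w clock).2.1 (post ++ L1)
        (dfsW adj fuel used order w clock).2.2 hG hlu hlo hws' hcnt
      exact ⟨L1 ++ L2, couple_trans adj used order post clock _ _ _ _ L1 L2 hc1 hc2⟩
    · have hgb : (PySem.List.pyGetD ((used, order, clock) : List Int × List Int × Int).1 w 0 == 0) = false := by
        simpa using hg
      have hgb' : (PySem.List.pyGetD ((used, post) : List Int × List Int).1 w 0 == 0) = false := by
        simpa using hg
      rw [if_neg (by simp [hgb]), if_neg (by simp [hgb'])]
      exact ihw used order post clock hG hu ho hws' hf

theorem dfsW_succ (adj : List (List Int)) (f : Nat) (used order : List Int) (x clock : Int) :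
    dfsW adj (f+1) used order x clock =
      (((PySem.List.pyGetD adj x []).foldl
          (fun (st : List Int × List Int × Int) w =>
            if PySem.List.pyGetD st.1 w 0 == 0 then dfsW adj f st.1 st.2.1 w st.2.2 else st)
          (PySem.List.pySetD used x 1, order, clock + 1)).1,
       PySem.List.pySetD
         ((PySem.List.pyGetD adj x []).foldl
          (fun (st : List Int × List Int × Int) w =>
            if PySem.List.pyGetD st.1 w 0 == 0 then dfsW adj f st.1 st.2.1 w st.2.2 else st)
          (PySem.List.pySetD used x 1, order, clock + 1)).2.1 x
         ((PySem.List.pyGetD adj x []).foldl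
          (fun (st : List Int × List Int × Int) w =>
            if PySem.List.pyGetD st.1 w 0 == 0 then dfsW adj f st.1 st.2.1 w st.2.2 else st)
          (PySem.List.pySetD used x 1, order, clock + 1)).2.2,
       ((PySem.List.pyGetD adj x []).foldl
          (fun (st : List Int × List Int × Int) w =>
            if PySem.List.pyGetD st.1 w 0 == 0 then dfsW adj f st.1 st.2.1 w st.2.2 else st)
          (PySem.List.pySetD used x 1, order, clock + 1)).2.2 + 1) := rfl

theorem dfsPost_succ (adj : List (List Int)) (f : Nat) (visited post : List Int) (x : Int) :
    dfsPost adj (f+1) visited post x =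
      (((PySem.List.pyGetD adj x []).foldl
          (fun (st : List Int × List Int) w =>
            if PySem.List.pyGetD st.1 w 0 == 0 then dfsPost adj f st.1 st.2 w else st)
          (PySem.List.pySetD visited x 1, post)).1,
       ((PySem.List.pyGetD adj x []).foldl
          (fun (st : List Int × List Int) w =>
            if PySem.List.pyGetD st.1 w 0 == 0 then dfsPost adj f st.1 st.2 w else st)
          (PySem.List.pySetD visited x 1, post)).2 ++ [x]) := rfl

theorem main_couple (adj : List (List Int)) : ∀ fuel, MainStmt adj fuel := by
  intro fuel
  induction fuel with
  | zero =>
    intro used order post x clock _ _ _ _ _ _ hf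
    exact absurd hf (Nat.not_lt_zero _)
  | succ f ihf =>
    intro used order post x clock hG hu ho hx0 hxlt hux hf
    have hxn : x.toNat < used.length := by omega
    have hxa : x.toNat < adj.length := by omega
    have hrow : ∀ w ∈ PySem.List.pyGetD adj x [], 0 ≤ w ∧ w < (adj.length : Int) := by
      intro w hw
      rw [PySem.List.pyGetD_of_nonneg _ _ hx0, List.getD_eq_getElem _ _ hxa] at hw
      exact hG _ (List.getElem_mem hxa) w hw
    have hu1 : (PySem.List.pySetD used x 1).length = adj.length := by
      rw [PySem.List.length_pySetD, hu]
    have hcntset := count_after_set used x hx0 hxn hux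
    have hcnt : (PySem.List.pySetD used x 1).count 0 < f := by omega
    obtain ⟨L1, hc⟩ := loop_couple adj f ihf (PySem.List.pyGetD adj x [])
      (PySem.List.pySetD used x 1) order post (clock + 1) hG hu1 ho hrow hcnt
    rw [dfsW_succ, dfsPost_succ]
    set Wl := (PySem.List.pyGetD adj x []).foldl
      (fun (st : List Int × List Int × Int) w =>
        if PySem.List.pyGetD st.1 w 0 == 0 then dfsW adj f st.1 st.2.1 w st.2.2 else st)
      (PySem.List.pySetD used x 1, order, clock + 1) with hWldef
    set Pl := (PySem.List.pyGetD adj x []).foldl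
      (fun (st : List Int × List Int) w =>
        if PySem.List.pyGetD st.1 w 0 == 0 then dfsPost adj f st.1 st.2 w else st)
      (PySem.List.pySetD used x 1, post) with hPldef
    obtain ⟨e1, e2, nd1, fresh1, char1, lu1, lo1, ck1, opres1, pw1, bnd1, cnt1⟩ := hc
    have h1x : PySem.List.pyGetD (PySem.List.pySetD used x 1) x 0 = 1 := by
      rw [pyGetD_pySetD_int used x x 1 hx0 hx0 hxn]; simp
    have husedne : ∀ j : Int, 0 ≤ j → j ≠ x →
        PySem.List.pyGetD (PySem.List.pySetD used x 1) j 0 = PySem.List.pyGetD used j 0 := by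
      intro j hj hne
      rw [pyGetD_pySetD_int used x j 1 hx0 hj hxn, if_neg hne]
    have hxnotL1 : x ∉ L1 := by
      intro h
      have := (fresh1 x h).2.2
      rw [h1x] at this
      norm_num at this
    have hxo : x.toNat < Wl.2.1.length := by rw [lo1]; omega
    have hval_x : PySem.List.pyGetD (PySem.List.pySetD Wl.2.1 x Wl.2.2) x 0 = Wl.2.2 := by
      rw [pyGetD_pySetD_int Wl.2.1 x x Wl.2.2 hx0 hx0 hxo]; simp
    have hval_ne : ∀ j : Int, 0 ≤ j → j ≠ x →
        PySem.List.pyGetD (PySem.List.pySetD Wl.2.1 x Wl.2.2) j 0 = PySem.List.pyGetD Wl.2.1 j 0 := by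
      intro j hj hne
      rw [pyGetD_pySetD_int Wl.2.1 x j Wl.2.2 hx0 hj hxo, if_neg hne]
    refine ⟨L1 ++ [x], by simp, e1, ?_, ?_, ?_, ?_, ?_, ?_, ?_, ?_, ?_, ?_, ?_⟩
    · rw [e2, List.append_assoc]
    · rw [List.nodup_append]
      refine ⟨nd1, by simp, ?_⟩
      intro a ha b hb
      rw [List.mem_singleton] at hb
      exact fun h => hxnotL1 ((h.trans hb) ▸ ha)
    · intro k hk
      rcases List.mem_append.mp hk with hk1 | hk2
      · obtain ⟨hk0, hklt, hz⟩ := fresh1 k hk1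
        have hne : k ≠ x := fun h => hxnotL1 (h ▸ hk1)
        rw [husedne k hk0 hne] at hz
        exact ⟨hk0, hklt, hz⟩
      · rw [List.mem_singleton] at hk2
        exact hk2 ▸ ⟨hx0, hxlt, hux⟩
    · intro j hj
      rw [char1 j hj]
      by_cases hj1 : j ∈ L1
      · simp [hj1]
      · by_cases hjx : j = x
        · simp [hjx, hxnotL1, h1x]
        · simp [hj1, hjx, husedne j hj hjx]
    · rw [lu1, PySem.List.length_pySetD]
    · rw [PySem.List.length_pySetD, lo1]
    · show Wl.2.2 + 1 = clock + 2 * ((L1 ++ [x]).length : Int)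
      rw [ck1]
      simp only [List.length_append, List.length_singleton]
      push_cast
      ring
    · intro j hj hjn
      have hjx : j ≠ x := fun h => hjn (List.mem_append.mpr (Or.inr (by simp [h])))
      have hj1 : j ∉ L1 := fun h => hjn (List.mem_append.mpr (Or.inl h))
      rw [hval_ne j hj hjx, opres1 j hj hj1]
    · rw [List.pairwise_append]
      refine ⟨pw1.imp_of_mem ?_, by simp, ?_⟩
      · intro a b ha hb hab
        have hax : a ≠ x := fun h => hxnotL1 (h ▸ ha)
        have hbx : b ≠ x := fun h => hxnotL1 (h ▸ hb)
        rw [hval_ne a (fresh1 a ha).1 hax, hval_ne b (fresh1 b hb).1 hbx]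
        exact hab
      · intro a ha b hb
        rw [List.mem_singleton] at hb
        rw [hb]
        have hax : a ≠ x := fun h => hxnotL1 (h ▸ ha)
        rw [hval_ne a (fresh1 a ha).1 hax, hval_x]
        exact (bnd1 a ha).2
    · intro k hk
      rcases List.mem_append.mp hk with hk1 | hk2
      · have hkx : k ≠ x := fun h => hxnotL1 (h ▸ hk1)
        have hb := bnd1 k hk1
        rw [hval_ne k (fresh1 k hk1).1 hkx]
        constructor
        · omega
        · show PySem.List.pyGetD Wl.2.1 k 0 < Wl.2.2 + 1
          omega
      · rw [List.mem_singleton] at hk2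
        rw [hk2, hval_x]
        constructor
        · show clock < Wl.2.2
          rw [ck1]; omega
        · show Wl.2.2 < Wl.2.2 + 1
          omega
    · show Wl.1.count 0 ≤ used.count 0
      omega

theorem top_loop (adj : List (List Int)) (hG : Good adj) :
    ∀ m : Nat, m ≤ adj.length →
    ∃ (used order post : List Int) (clock : Int),
      ((PySem.List.pyRange 0 (m : Int)).foldl
        (fun (st : List Int × List Int × Int) i =>
          if PySem.List.pyGetD st.1 i 0 == 0 then dfsW adj (adj.length+1) st.1 st.2.1 i st.2.2 else st)
        (List.replicate adj.length 0, List.replicate adj.length 0, 1)) = (used, order, clock) ∧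
      ((PySem.List.pyRange 0 (m : Int)).foldl
        (fun (st : List Int × List Int) i =>
          if PySem.List.pyGetD st.1 i 0 == 0 then dfsPost adj (adj.length+1) st.1 st.2 i else st)
        (List.replicate adj.length 0, [])) = (used, post) ∧
      used.length = adj.length ∧ order.length = adj.length ∧
      (∀ j : Int, 0 ≤ j → PySem.List.pyGetD used j 0 = if j ∈ post then 1 else 0) ∧
      post.Nodup ∧
      (∀ k ∈ post, 0 ≤ k ∧ k < (adj.length : Int)) ∧
      (∀ i : Int, 0 ≤ i → i < (m : Int) → i ∈ post) ∧
      post.Pairwise (fun a b => PySem.List.pyGetD order a 0 < PySem.List.pyGetD order b 0) ∧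
      (∀ k ∈ post, PySem.List.pyGetD order k 0 < clock) := by
  intro m
  induction m with
  | zero =>
    intro _
    refine ⟨List.replicate adj.length 0, List.replicate adj.length 0, [], 1, ?_, ?_,
      List.length_replicate, List.length_replicate,
      fun j hj => by simp [pyGetD_replicate _ j hj], by simp, by simp,
      fun i hi0 hilt => by simp at hilt; omega, by simp, by simp⟩
    · rw [show ((0 : Nat) : Int) = 0 from rfl, PySem.List.pyRange_one_eq_nil (le_refl 0)]
      rfl
    · rw [show ((0 : Nat) : Int) = 0 from rfl, PySem.List.pyRange_one_eq_nil (le_refl 0)]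
      rfl
  | succ m ihm =>
    intro hm1
    obtain ⟨used, order, post, clock, hA, hB, hu, ho, hchar, hnd, hbnds, hcomp, hpw, hblt⟩ :=
      ihm (Nat.le_of_succ_le hm1)
    have hm0 : (0 : Int) ≤ (m : Int) := by omega
    have hrange : PySem.List.pyRange 0 ((m+1 : Nat) : Int) =
        PySem.List.pyRange 0 ((m : Nat) : Int) ++ [((m : Nat) : Int)] := by
      push_cast
      exact PySem.List.pyRange_one_succ_right hm0
    rw [hrange, List.foldl_append, List.foldl_append, hA, hB]
    simp only [List.foldl_cons, List.foldl_nil]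
    by_cases hmem : ((m : Nat) : Int) ∈ post
    · have hg1 : PySem.List.pyGetD used ((m : Nat) : Int) 0 = 1 := by
        rw [hchar _ hm0, if_pos hmem]
      rw [if_neg (by simp [hg1]), if_neg (by simp [hg1])]
      refine ⟨used, order, post, clock, rfl, rfl, hu, ho, hchar, hnd, hbnds, ?_, hpw, hblt⟩
      intro i hi0 hilt
      rcases (by omega : i < (m : Int) ∨ i = (m : Int)) with h | h
      · exact hcomp i hi0 h
      · rw [h]; exact hmem
    · have hg0 : PySem.List.pyGetD used ((m : Nat) : Int) 0 = 0 := by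
        rw [hchar _ hm0, if_neg hmem]
      have hgb : (PySem.List.pyGetD ((used, order, clock) : List Int × List Int × Int).1 ((m : Nat) : Int) 0 == 0) = true := by
        simp [hg0]
      have hgb' : (PySem.List.pyGetD ((used, post) : List Int × List Int).1 ((m : Nat) : Int) 0 == 0) = true := by
        simp [hg0]
      rw [if_pos hgb, if_pos hgb']
      have hmlt : ((m : Nat) : Int) < (adj.length : Int) := by omega
      have hcnt : used.count 0 < adj.length + 1 := by
        have := List.count_le_length (a := (0 : Int)) (l := used)
        omega
      obtain ⟨L, hxL, hc⟩ := main_couple adj (adj.length + 1) used order post ((m : Nat) : Int)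
        clock hG hu ho hm0 hmlt hg0 hcnt
      obtain ⟨e1, e2, ndL, freshL, charL, luL, loL, ckL, opresL, pwL, bndL, _cntL⟩ := hc
      set W := dfsW adj (adj.length + 1) used order ((m : Nat) : Int) clock with hW
      have hdisj : ∀ k ∈ L, k ∉ post := by
        intro k hk hkp
        obtain ⟨hk0, _, hz⟩ := freshL k hk
        rw [hchar _ hk0, if_pos hkp] at hz
        norm_num at hz
      refine ⟨W.1, W.2.1, post ++ L, W.2.2, rfl, Prod.ext e1 e2, by rw [luL, hu],
        by rw [loL, ho], ?_, ?_, ?_, ?_, ?_, ?_⟩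
      · intro j hj
        rw [charL j hj, hchar j hj]
        by_cases hjL : j ∈ L
        · simp [hjL]
        · by_cases hjp : j ∈ post <;> simp [hjL, hjp]
      · rw [List.nodup_append]
        exact ⟨hnd, ndL, fun a ha b hb hab => hdisj b hb (hab ▸ ha)⟩
      · intro k hk
        rcases List.mem_append.mp hk with h | h
        · exact hbnds k h
        · exact ⟨(freshL k h).1, (freshL k h).2.1⟩
      · intro i hi0 hilt
        rcases (by omega : i < (m : Int) ∨ i = (m : Int)) with h | h
        · exact List.mem_append.mpr (Or.inl (hcomp i hi0 h))
        · exact List.mem_append.mpr (Or.inr (h ▸ hxL))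
      · rw [List.pairwise_append]
        have hpres : ∀ a ∈ post, PySem.List.pyGetD W.2.1 a 0 = PySem.List.pyGetD order a 0 := by
          intro a ha
          exact opresL a (hbnds a ha).1 (fun h => hdisj a h ha)
        refine ⟨hpw.imp_of_mem ?_, pwL, ?_⟩
        · intro a b ha hb hab
          rw [hpres a ha, hpres b hb]; exact hab
        · intro a ha b hb
          rw [hpres a ha]
          calc PySem.List.pyGetD order a 0 < clock := hblt a ha
            _ < PySem.List.pyGetD W.2.1 b 0 := (bndL b hb).1
      · intro k hk
        have hckW : clock ≤ W.2.2 := by rw [ckL]; omega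
        rcases List.mem_append.mp hk with h | h
        · rw [opresL k (hbnds k h).1 (fun hh => hdisj k hh h)]
          exact lt_of_lt_of_le (hblt k h) hckW
        · exact (bndL k h).2

theorem AB_core (adj_array adj_reverse : List (List Int)) (hGr : Good adj_reverse) :
    number_of_strongly_connected_components adj_array adj_reverse =
      nsccRec adj_array adj_reverse := by
  obtain ⟨used, order, post, clock, hA, hB, _hu, _ho, _hchar, hnd, hbnds, hcomp, hpw, hblt⟩ :=
    top_loop adj_reverse hGr adj_reverse.length (le_refl _)
  have hperm : post.Perm (PySem.List.pyRange 0 (adj_reverse.length : Int)) := by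
    rw [List.perm_ext_iff_of_nodup hnd (PySem.List.nodup_pyRange_one _ _)]
    intro a
    constructor
    · intro ha
      exact PySem.List.mem_pyRange_one.mpr ⟨(hbnds a ha).1, (hbnds a ha).2⟩
    · intro ha
      obtain ⟨h1, h2⟩ := PySem.List.mem_pyRange_one.mp ha
      exact hcomp a h1 h2
  have hsorted : PySem.List.sorted (PySem.List.pyRange 0 (adj_reverse.length : Int))
      (fun k => PySem.List.pyGetD order k 0) true = post.reverse := by
    apply PySem.List.sorted_rev_eq_of_perm_of_pairwise_gt
    · exact (List.reverse_perm post).trans hperm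
    · rw [List.pairwise_reverse]
      exact hpw
  have hsecond : ∀ l : List Int,
      (l.foldl (fun (st : List Int × Int) i =>
          if PySem.List.pyGetD st.1 i 0 == 0 then (dfsA adj_array (adj_array.length+1) st.1 i, st.2 + 1) else st)
        (List.replicate adj_array.length 0, 0)) =
      (l.foldl (fun (st : List Int × Int) i =>
          if PySem.List.pyGetD st.1 i 0 == 0 then (dfsMark adj_array (adj_array.length+1) st.1 i, st.2 + 1) else st)
        (List.replicate adj_array.length 0, 0)) := by
    intro l
    apply List.foldl_ext
    intro a b _
    by_cases h : PySem.List.pyGetD a.1 b 0 == 0 <;> simp [h, dfsA_eq_dfsMark]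
  show number_of_strongly_connected_components adj_array adj_reverse =
    nsccRec adj_array adj_reverse
  unfold number_of_strongly_connected_components topological_sort nsccRec
  simp only [hA, hB, hsorted, hsecond]

-- vertex-label normalisation: Python's negative-index wraparound made explicit
def normI (n : Nat) (w : Int) : Int := if w < 0 then w + n else w

def normAdj (n : Nat) (adj : List (List Int)) : List (List Int) := adj.map (List.map (normI n))

def GoodW (n : Nat) (adj : List (List Int)) : Prop :=
  ∀ row ∈ adj, ∀ w ∈ row, -(n : Int) ≤ w ∧ w < (n : Int)

theorem normI_of_nonneg (n : Nat) (w : Int) (h : 0 ≤ w) : normI n w = w := by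
  unfold normI
  rw [if_neg (by omega)]

theorem length_normAdj (n : Nat) (adj : List (List Int)) : (normAdj n adj).length = adj.length :=
  List.length_map ..

theorem good_normAdj (n : Nat) (adj : List (List Int)) (hG : GoodW n adj) (hl : adj.length = n) :
    Good (normAdj n adj) := by
  intro row hrow w hw
  rw [normAdj, List.mem_map] at hrow
  obtain ⟨row0, hr0, rfl⟩ := hrow
  rw [List.mem_map] at hw
  obtain ⟨w0, hw0, rfl⟩ := hw
  have hb := hG row0 hr0 w0 hw0
  rw [length_normAdj, hl]
  unfold normI
  split_ifs <;> constructor <;> omega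

theorem pyGetD_norm {α : Type} (n : Nat) (xs : List α) (d : α) (hl : xs.length = n) (w : Int)
    (h1 : -(n : Int) ≤ w) (h2 : w < (n : Int)) :
    PySem.List.pyGetD xs w d = PySem.List.pyGetD xs (normI n w) d := by
  unfold normI
  split_ifs with hneg
  · have hA : ¬ ((0:Int) ≤ w) := by omega
    have hB : -((xs.length : Nat) : Int) ≤ w := by omega
    have hC : (0:Int) ≤ w + n := by omega
    have hD : w + n < ((xs.length : Nat) : Int) := by omega
    simp only [PySem.List.pyGetD, PySem.List.pyGet?, PySem.List.pyIdx?, if_neg hA, if_pos hB,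
      if_pos hC, if_pos hD, Option.bind_some]
    congr 2
    omega
  · rfl

theorem pySetD_norm (n : Nat) (xs : List Int) (v : Int) (hl : xs.length = n) (w : Int)
    (h1 : -(n : Int) ≤ w) (h2 : w < (n : Int)) :
    PySem.List.pySetD xs w v = PySem.List.pySetD xs (normI n w) v := by
  unfold normI
  split_ifs with hneg
  · have hA : ¬ ((0:Int) ≤ w) := by omega
    have hB : -((xs.length : Nat) : Int) ≤ w := by omega
    have hC : (0:Int) ≤ w + n := by omega
    have hD : w + n < ((xs.length : Nat) : Int) := by omega
    simp only [PySem.List.pySetD, PySem.List.pySet?, PySem.List.pyIdx?, if_neg hA, if_pos hB,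
      if_pos hC, if_pos hD, Option.map_some, Option.getD_some]
    congr 1
    omega
  · rfl

theorem row_norm (n : Nat) (adj : List (List Int)) (x : Int) :
    PySem.List.pyGetD (normAdj n adj) x [] = (PySem.List.pyGetD adj x []).map (normI n) := by
  simpa [normAdj] using PySem.List.pyGetD_map (List.map (normI n)) adj x []

theorem row_range (n : Nat) (adj : List (List Int)) (hl : adj.length = n) (hG : GoodW n adj)
    (x : Int) (h1 : -(n : Int) ≤ x) (h2 : x < (n : Int)) :
    ∀ w ∈ PySem.List.pyGetD adj x [], -(n : Int) ≤ w ∧ w < (n : Int) := by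
  intro w hw
  have hmem : PySem.List.pyGetD adj x [] ∈ adj :=
    PySem.List.pyGetD_mem adj [] (by rw [hl]; exact ⟨h1, h2⟩)
  exact hG _ hmem w hw

theorem foldl_congr_inv {α β : Type} (Inv : α → Prop) (f g : α → β → α) (l : List β) :
    ∀ st : α, Inv st → (∀ a b, Inv a → b ∈ l → f a b = g a b ∧ Inv (f a b)) →
    l.foldl f st = l.foldl g st := by
  induction l with
  | nil => intros; rfl
  | cons b l ih =>
    intro st h0 hstep
    simp only [List.foldl_cons]
    obtain ⟨he, hi⟩ := hstep st b h0 (by simp)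
    rw [← he]
    exact ih (f st b) hi (fun a b' ha hb' => hstep a b' ha (by simp [hb']))

theorem foldl_rel {α α' β : Type} (R : α → α' → Prop) (f : α → β → α) (g : α' → β → α') (l : List β) :
    ∀ (st : α) (st' : α'), R st st' → (∀ a a' b, R a a' → b ∈ l → R (f a b) (g a' b)) →
    R (l.foldl f st) (l.foldl g st') := by
  induction l with
  | nil => intro st st' h0 _; exact h0
  | cons b l ih =>
    intro st st' h0 hstep
    simp only [List.foldl_cons]
    exact ih (f st b) (g st' b) (hstep st st' b h0 (by simp))
      (fun a a' b' ha hb' => hstep a a' b' ha (by simp [hb']))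

theorem dfsW_len (adj : List (List Int)) :
    ∀ (fuel : Nat) (u o : List Int) (x c : Int),
    (dfsW adj fuel u o x c).1.length = u.length ∧ (dfsW adj fuel u o x c).2.1.length = o.length := by
  intro fuel
  induction fuel with
  | zero => intros; exact ⟨rfl, rfl⟩
  | succ f ih =>
    intro u o x c
    rw [dfsW_succ]
    have hfold := List.foldlRecOn
      (motive := fun st : List Int × List Int × Int => st.1.length = u.length ∧ st.2.1.length = o.length)
      (PySem.List.pyGetD adj x [])
      (fun st w => if PySem.List.pyGetD st.1 w 0 == 0 then dfsW adj f st.1 st.2.1 w st.2.2 else st)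
      (b := (PySem.List.pySetD u x 1, o, c + 1))
      ⟨by simp [PySem.List.length_pySetD], rfl⟩
      (fun st hst w _ => by
        by_cases hg : PySem.List.pyGetD st.1 w 0 == 0
        · simp only [if_pos hg]
          exact ⟨(ih st.1 st.2.1 w st.2.2).1.trans hst.1, (ih st.1 st.2.1 w st.2.2).2.trans hst.2⟩
        · simp only [if_neg hg]; exact hst)
    exact ⟨hfold.1, by rw [PySem.List.length_pySetD]; exact hfold.2⟩

theorem dfsPost_len (adj : List (List Int)) :
    ∀ (fuel : Nat) (v p : List Int) (x : Int), (dfsPost adj fuel v p x).1.length = v.length := by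
  intro fuel
  induction fuel with
  | zero => intros; rfl
  | succ f ih =>
    intro v p x
    rw [dfsPost_succ]
    exact List.foldlRecOn
      (motive := fun st : List Int × List Int => st.1.length = v.length)
      (PySem.List.pyGetD adj x [])
      (fun st w => if PySem.List.pyGetD st.1 w 0 == 0 then dfsPost adj f st.1 st.2 w else st)
      (b := (PySem.List.pySetD v x 1, p))
      (by simp [PySem.List.length_pySetD])
      (fun st hst w _ => by
        by_cases hg : PySem.List.pyGetD st.1 w 0 == 0
        · simp only [if_pos hg]; exact (ih st.1 st.2 w).trans hst
        · simp only [if_neg hg]; exact hst)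

theorem dfsMark_len (adj : List (List Int)) :
    ∀ (fuel : Nat) (u : List Int) (x : Int), (dfsMark adj fuel u x).length = u.length := by
  intro fuel
  induction fuel with
  | zero => intros; rfl
  | succ f ih =>
    intro u x
    simp only [dfsMark]
    exact List.foldlRecOn
      (motive := fun st : List Int => st.length = u.length)
      (PySem.List.pyGetD adj x [])
      (fun st w => if PySem.List.pyGetD st w 0 == 0 then dfsMark adj f st w else st)
      (b := PySem.List.pySetD u x 1)
      (by simp [PySem.List.length_pySetD])
      (fun st hst w _ => by
        by_cases hg : PySem.List.pyGetD st w 0 == 0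
        · simp only [if_pos hg]; exact (ih st w).trans hst
        · simp only [if_neg hg]; exact hst)

theorem dfsMark_norm (n : Nat) (adj : List (List Int)) (hl : adj.length = n) (hG : GoodW n adj) :
    ∀ (fuel : Nat) (u : List Int) (x : Int), u.length = n →
      -(n : Int) ≤ x → x < (n : Int) →
      dfsMark adj fuel u x = dfsMark (normAdj n adj) fuel u (normI n x) := by
  intro fuel
  induction fuel with
  | zero => intros; rfl
  | succ f ih =>
    intro u x hu hx1 hx2
    simp only [dfsMark]
    rw [← pySetD_norm n u 1 hu x hx1 hx2,
      ← pyGetD_norm n (normAdj n adj) [] (by rw [length_normAdj, hl]) x hx1 hx2,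
      row_norm, List.foldl_map]
    have hR := row_range n adj hl hG x hx1 hx2
    exact foldl_congr_inv
      (fun st : List Int => st.length = n)
      (fun st w => if PySem.List.pyGetD st w 0 == 0 then dfsMark adj f st w else st)
      (fun st w => if PySem.List.pyGetD st (normI n w) 0 == 0
        then dfsMark (normAdj n adj) f st (normI n w) else st)
      (PySem.List.pyGetD adj x [])
      (PySem.List.pySetD u x 1)
      (by simp [PySem.List.length_pySetD, hu])
      (fun st w hst hw => by
        obtain ⟨hw1, hw2⟩ := hR w hw
        beta_reduce
        rw [← pyGetD_norm n st 0 hst w hw1 hw2]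
        constructor
        · by_cases hg : PySem.List.pyGetD st w 0 == 0
          · simp only [if_pos hg]
            exact ih st w hst hw1 hw2
          · simp only [if_neg hg]
        · by_cases hg : PySem.List.pyGetD st w 0 == 0
          · simp only [if_pos hg]; exact (dfsMark_len adj f st w).trans hst
          · simp only [if_neg hg]; exact hst)

theorem dfsW_norm (n : Nat) (adj : List (List Int)) (hl : adj.length = n) (hG : GoodW n adj) :
    ∀ (fuel : Nat) (u o : List Int) (x c : Int), u.length = n → o.length = n →
      -(n : Int) ≤ x → x < (n : Int) →
      dfsW adj fuel u o x c = dfsW (normAdj n adj) fuel u o (normI n x) c := by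
  intro fuel
  induction fuel with
  | zero => intros; rfl
  | succ f ih =>
    intro u o x c hu ho hx1 hx2
    rw [dfsW_succ, dfsW_succ,
      ← pySetD_norm n u 1 hu x hx1 hx2,
      ← pyGetD_norm n (normAdj n adj) [] (by rw [length_normAdj, hl]) x hx1 hx2,
      row_norm, List.foldl_map]
    have hR := row_range n adj hl hG x hx1 hx2
    have hfold := foldl_congr_inv
      (fun st : List Int × List Int × Int => st.1.length = n ∧ st.2.1.length = n)
      (fun st w => if PySem.List.pyGetD st.1 w 0 == 0 then dfsW adj f st.1 st.2.1 w st.2.2 else st)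
      (fun st w => if PySem.List.pyGetD st.1 (normI n w) 0 == 0
        then dfsW (normAdj n adj) f st.1 st.2.1 (normI n w) st.2.2 else st)
      (PySem.List.pyGetD adj x [])
      (PySem.List.pySetD u x 1, o, c + 1)
      ⟨by simp [PySem.List.length_pySetD, hu], ho⟩
      (fun st w hst hw => by
        obtain ⟨hw1, hw2⟩ := hR w hw
        beta_reduce
        rw [← pyGetD_norm n st.1 0 hst.1 w hw1 hw2]
        constructor
        · by_cases hg : PySem.List.pyGetD st.1 w 0 == 0
          · simp only [if_pos hg]
            exact ih st.1 st.2.1 w st.2.2 hst.1 hst.2 hw1 hw2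
          · simp only [if_neg hg]
        · by_cases hg : PySem.List.pyGetD st.1 w 0 == 0
          · simp only [if_pos hg]
            exact ⟨(dfsW_len adj f st.1 st.2.1 w st.2.2).1.trans hst.1,
              (dfsW_len adj f st.1 st.2.1 w st.2.2).2.trans hst.2⟩
          · simp only [if_neg hg]; exact hst)
    rw [← hfold]
    have hflen := List.foldlRecOn
      (motive := fun st : List Int × List Int × Int => st.2.1.length = n)
      (PySem.List.pyGetD adj x [])
      (fun st w => if PySem.List.pyGetD st.1 w 0 == 0 then dfsW adj f st.1 st.2.1 w st.2.2 else st)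
      (b := (PySem.List.pySetD u x 1, o, c + 1)) ho
      (fun st hst w _ => by
        by_cases hg : PySem.List.pyGetD st.1 w 0 == 0
        · simp only [if_pos hg]; exact (dfsW_len adj f st.1 st.2.1 w st.2.2).2.trans hst
        · simp only [if_neg hg]; exact hst)
    rw [← pySetD_norm n _ _ hflen x hx1 hx2]


-- ===== coupling the explicit stack machine (port B) with the recursive reference =====

theorem iterDFS_nil (adj : List (List Int)) (f : Nat) (v p : List Int) :
    iterDFS adj f v p [] = (v, p) := by cases f <;> rfl

theorem iterDFS_cons (adj : List (List Int)) (f : Nat) (v p : List Int) (x k : Int)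
    (rest : List (Int × Int)) :
    iterDFS adj (f+1) v p ((x, k) :: rest) =
      (if skipSeen v (PySem.List.pyGetD adj x []) k ((PySem.List.pyGetD adj x []).length + 1)
            < ((PySem.List.pyGetD adj x []).length : Int) then
        iterDFS adj f
          (PySem.List.pySetD v
            (PySem.List.pyGetD (PySem.List.pyGetD adj x [])
              (skipSeen v (PySem.List.pyGetD adj x []) k ((PySem.List.pyGetD adj x []).length + 1)) 0) 1)
          p
          ((PySem.List.pyGetD (PySem.List.pyGetD adj x [])
              (skipSeen v (PySem.List.pyGetD adj x []) k ((PySem.List.pyGetD adj x []).length + 1)) 0, 0)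
            :: (x, skipSeen v (PySem.List.pyGetD adj x []) k ((PySem.List.pyGetD adj x []).length + 1) + 1)
            :: rest)
      else iterDFS adj f v (p ++ [x]) rest) := rfl

theorem skipSeen_succ (seen row : List Int) (k : Int) (f : Nat) :
    skipSeen seen row k (f+1) =
      if k < (row.length : Int) ∧ PySem.List.pyGetD seen (PySem.List.pyGetD row k 0) 0 ≠ 0 then
        skipSeen seen row (k+1) f
      else k := rfl

theorem skipSeen_ge (seen row : List Int) :
    ∀ (f : Nat) (k : Int), k ≤ skipSeen seen row k f := by
  intro f
  induction f with
  | zero => intro k; exact le_refl _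
  | succ f ih =>
    intro k
    rw [skipSeen_succ]
    split_ifs with h
    · exact le_trans (by omega) (ih (k+1))
    · exact le_refl _

-- the per-row fold of the recursive reference, from an arbitrary starting state
def refLoop (adj : List (List Int)) (F : Nat) (v p : List Int) (ws : List Int) :
    List Int × List Int :=
  ws.foldl (fun st w => if PySem.List.pyGetD st.1 w 0 == 0 then dfsPost adj F st.1 st.2 w else st)
    (v, p)

theorem refLoop_nil (adj : List (List Int)) (F : Nat) (v p : List Int) :
    refLoop adj F v p [] = (v, p) := rfl

theorem refLoop_cons (adj : List (List Int)) (F : Nat) (v p : List Int) (w : Int) (ws : List Int) :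
    refLoop adj F v p (w :: ws) =
      if PySem.List.pyGetD v w 0 == 0 then
        refLoop adj F (dfsPost adj F v p w).1 (dfsPost adj F v p w).2 ws
      else refLoop adj F v p ws := by
  simp only [refLoop, List.foldl_cons]
  split_ifs with h
  · rw [Prod.mk.eta]
  · rfl

theorem count_pySetD_one_le (v : List Int) (x : Int) :
    (PySem.List.pySetD v x 1).count 0 ≤ v.count 0 := by
  have h : ∀ (i : Nat), ((v.set i 1).count 0 : Nat) ≤ v.count 0 := by
    intro i
    by_cases hi : i < v.length
    · rw [List.count_set hi]
      split_ifs <;> simp_all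
    · rw [List.set_eq_of_length_le (by omega)]
  simp only [PySem.List.pySetD, PySem.List.pySet?, PySem.List.pyIdx?]
  split_ifs <;> simp <;> apply h

theorem dfsPost_count (adj : List (List Int)) :
    ∀ (f : Nat) (v p : List Int) (x : Int), (dfsPost adj f v p x).1.count 0 ≤ v.count 0 := by
  intro f
  induction f with
  | zero => intros; exact le_refl _
  | succ f ih =>
    intro v p x
    rw [dfsPost_succ]
    exact List.foldlRecOn
      (motive := fun st : List Int × List Int => st.1.count 0 ≤ v.count 0)
      (PySem.List.pyGetD adj x [])
      (fun st w => if PySem.List.pyGetD st.1 w 0 == 0 then dfsPost adj f st.1 st.2 w else st)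
      (b := (PySem.List.pySetD v x 1, p))
      (count_pySetD_one_le v x)
      (fun st hst w _ => by
        by_cases hg : PySem.List.pyGetD st.1 w 0 == 0
        · simp only [if_pos hg]; exact le_trans (ih st.1 st.2 w) hst
        · simp only [if_neg hg]; exact hst)

theorem refLoop_count (adj : List (List Int)) (F : Nat) :
    ∀ (ws : List Int) (v p : List Int), (refLoop adj F v p ws).1.count 0 ≤ v.count 0 := by
  intro ws
  induction ws with
  | nil => intros; exact le_refl _
  | cons w ws ih =>
    intro v p
    rw [refLoop_cons]
    by_cases hg : PySem.List.pyGetD v w 0 == 0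
    · simp only [if_pos hg]
      exact le_trans (ih _ _) (dfsPost_count adj F v p w)
    · simp only [if_neg hg]
      exact ih v p

theorem refLoop_len (adj : List (List Int)) (F : Nat) :
    ∀ (ws : List Int) (v p : List Int), (refLoop adj F v p ws).1.length = v.length := by
  intro ws
  induction ws with
  | nil => intros; rfl
  | cons w ws ih =>
    intro v p
    rw [refLoop_cons]
    by_cases hg : PySem.List.pyGetD v w 0 == 0
    · simp only [if_pos hg]
      exact (ih _ _).trans (dfsPost_len adj F v p w)
    · simp only [if_neg hg]
      exact ih v p

theorem row_mem_good (adj : List (List Int)) (hG : Good adj) (x : Int) (h0 : 0 ≤ x)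
    (hlt : x < (adj.length : Int)) :
    ∀ w ∈ PySem.List.pyGetD adj x [], 0 ≤ w ∧ w < (adj.length : Int) := by
  intro w hw
  have hxa : x.toNat < adj.length := by omega
  rw [PySem.List.pyGetD_of_nonneg _ _ h0, List.getD_eq_getElem _ _ hxa] at hw
  exact hG _ (List.getElem_mem hxa) w hw

-- recursive reference results do not depend on the fuel, once it exceeds the zero count
theorem dfsPost_fuel (adj : List (List Int)) (hG : Good adj) :
    ∀ (c f₁ f₂ : Nat) (v p : List Int) (x : Int), v.count 0 = c →
      v.length = adj.length → 0 ≤ x → x < (adj.length : Int) →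
      PySem.List.pyGetD v x 0 = 0 →
      v.count 0 < f₁ → v.count 0 < f₂ →
      dfsPost adj f₁ v p x = dfsPost adj f₂ v p x := by
  intro c
  induction c using Nat.strong_induction_on with
  | _ c ih =>
    intro f₁ f₂ v p x hc hlen hx0 hxlt hfresh h1 h2
    obtain ⟨a, rfl⟩ : ∃ a, f₁ = a + 1 := ⟨f₁ - 1, by omega⟩
    obtain ⟨b, rfl⟩ : ∃ b, f₂ = b + 1 := ⟨f₂ - 1, by omega⟩
    rw [dfsPost_succ, dfsPost_succ]
    have hxn : x.toNat < v.length := by omega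
    have hcnt := count_after_set v x hx0 hxn hfresh
    have hrow := row_mem_good adj hG x hx0 hxlt
    have hloop : ∀ (ws : List Int), (∀ w ∈ ws, 0 ≤ w ∧ w < (adj.length : Int)) →
        ∀ (st : List Int × List Int), st.1.length = adj.length →
        st.1.count 0 + 1 ≤ c →
        ws.foldl (fun st w => if PySem.List.pyGetD st.1 w 0 == 0 then dfsPost adj a st.1 st.2 w else st) st =
        ws.foldl (fun st w => if PySem.List.pyGetD st.1 w 0 == 0 then dfsPost adj b st.1 st.2 w else st) st := by
      intro ws
      induction ws with
      | nil => intros; rfl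
      | cons w ws ihw =>
        intro hws st hstl hstc
        obtain ⟨hw0, hwlt⟩ := hws w (by simp)
        simp only [List.foldl_cons]
        by_cases hg : PySem.List.pyGetD st.1 w 0 == 0
        · rw [if_pos hg, if_pos hg]
          have hgv : PySem.List.pyGetD st.1 w 0 = 0 := by simpa using hg
          have heq : dfsPost adj a st.1 st.2 w = dfsPost adj b st.1 st.2 w :=
            ih (st.1.count 0) (by omega) a b st.1 st.2 w rfl hstl hw0 hwlt hgv (by omega) (by omega)
          rw [heq]
          have hcle := dfsPost_count adj b st.1 st.2 w
          exact ihw (fun u hu => hws u (by simp [hu])) _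
            ((dfsPost_len adj b st.1 st.2 w).trans hstl) (by omega)
        · rw [if_neg hg, if_neg hg]
          exact ihw (fun u hu => hws u (by simp [hu])) st hstl hstc
    have hfold := hloop (PySem.List.pyGetD adj x []) hrow (PySem.List.pySetD v x 1, p)
      (by rw [PySem.List.length_pySetD]; exact hlen) (by simp only; omega)
    rw [hfold]

theorem refLoop_fuel (adj : List (List Int)) (hG : Good adj) (f₁ f₂ : Nat) :
    ∀ (ws : List Int) (v p : List Int),
      (∀ w ∈ ws, 0 ≤ w ∧ w < (adj.length : Int)) →
      v.length = adj.length → v.count 0 < f₁ → v.count 0 < f₂ →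
      refLoop adj f₁ v p ws = refLoop adj f₂ v p ws := by
  intro ws
  induction ws with
  | nil => intros; rfl
  | cons w ws ih =>
    intro v p hws hlen h1 h2
    obtain ⟨hw0, hwlt⟩ := hws w (by simp)
    rw [refLoop_cons, refLoop_cons]
    by_cases hg : PySem.List.pyGetD v w 0 == 0
    · rw [if_pos hg, if_pos hg]
      have hgv : PySem.List.pyGetD v w 0 = 0 := by simpa using hg
      have heq := dfsPost_fuel adj hG (v.count 0) f₁ f₂ v p w rfl hlen hw0 hwlt hgv h1 h2
      rw [heq]
      have hcle := dfsPost_count adj f₂ v p w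
      exact ih _ _ (fun u hu => hws u (by simp [hu]))
        ((dfsPost_len adj f₂ v p w).trans hlen) (by omega) (by omega)
    · rw [if_neg hg, if_neg hg]
      exact ih v p (fun u hu => hws u (by simp [hu])) hlen h1 h2

-- the skip loop matches the visited-neighbor no-ops of the reference fold
theorem skipFold (adj : List (List Int)) (F : Nat) (v p row : List Int) :
    ∀ (f : Nat) (k : Int), 0 ≤ k → k ≤ (row.length : Int) →
      ((row.length : Int) - k).toNat < f →
      k ≤ skipSeen v row k f ∧ skipSeen v row k f ≤ (row.length : Int) ∧
      refLoop adj F v p (row.drop k.toNat) =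
        refLoop adj F v p (row.drop (skipSeen v row k f).toNat) ∧
      (skipSeen v row k f < (row.length : Int) →
        PySem.List.pyGetD v (PySem.List.pyGetD row (skipSeen v row k f) 0) 0 = 0) := by
  intro f
  induction f with
  | zero => intro k _ _ hf; omega
  | succ f ih =>
    intro k h0 hkle hf
    rw [skipSeen_succ]
    by_cases hcond : k < (row.length : Int) ∧ PySem.List.pyGetD v (PySem.List.pyGetD row k 0) 0 ≠ 0
    · rw [if_pos hcond]
      obtain ⟨hklt, hvis⟩ := hcond
      obtain ⟨hr1, hr2, hr3, hr4⟩ := ih (k+1) (by omega) (by omega) (by omega)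
      refine ⟨by omega, hr2, ?_, hr4⟩
      have hktn : k.toNat < row.length := by omega
      have hdc : row.drop k.toNat = row[k.toNat] :: row.drop (k.toNat + 1) :=
        List.drop_eq_getElem_cons hktn
      have htn : (k + 1).toNat = k.toNat + 1 := by omega
      rw [hdc, refLoop_cons, if_neg (by
        rw [← pyGetD_nonneg_eq_getElem row k h0 hktn]
        simpa using hvis), ← htn]
      exact hr3
    · rw [if_neg hcond]
      refine ⟨le_refl _, hkle, rfl, fun h => ?_⟩
      by_contra hne
      exact hcond ⟨h, hne⟩

-- one stack frame of the machine computes exactly the reference fold over the remaining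
-- neighbors followed by the finish append, consuming one fuel unit per iteration
theorem frame_sim (adj : List (List Int)) (hG : Good adj) :
    ∀ (fuel : Nat) (v p : List Int) (x k : Int) (rest : List (Int × Int)),
      v.length = adj.length → 0 ≤ x → x < (adj.length : Int) → 0 ≤ k →
      2 * v.count 0 < fuel →
      ∃ fuel',
        iterDFS adj fuel v p ((x, k) :: rest) =
          iterDFS adj fuel'
            (refLoop adj (adj.length + 1) v p ((PySem.List.pyGetD adj x []).drop k.toNat)).1
            ((refLoop adj (adj.length + 1) v p ((PySem.List.pyGetD adj x []).drop k.toNat)).2 ++ [x])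
            rest ∧
        fuel' + 2 * (v.count 0 -
          (refLoop adj (adj.length + 1) v p ((PySem.List.pyGetD adj x []).drop k.toNat)).1.count 0)
          + 1 = fuel := by
  intro fuel
  induction fuel using Nat.strong_induction_on with
  | _ fuel ihf =>
    intro v p x k rest hlen hx0 hxlt hk0 hf
    obtain ⟨f, rfl⟩ : ∃ f, fuel = f + 1 := ⟨fuel - 1, by omega⟩
    rw [iterDFS_cons]
    by_cases hklen : k ≤ ((PySem.List.pyGetD adj x []).length : Int)
    · obtain ⟨hge, hle, hfold, hfresh'⟩ := skipFold adj (adj.length + 1) v p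
        (PySem.List.pyGetD adj x []) ((PySem.List.pyGetD adj x []).length + 1) k hk0 hklen (by omega)
      by_cases hlt : skipSeen v (PySem.List.pyGetD adj x []) k ((PySem.List.pyGetD adj x []).length + 1)
          < ((PySem.List.pyGetD adj x []).length : Int)
      · -- descend into a fresh neighbor
        rw [if_pos hlt]
        set row := PySem.List.pyGetD adj x [] with hrowdef
        set k' := skipSeen v row k (row.length + 1) with hk'def
        set w := PySem.List.pyGetD row k' 0 with hwdef
        have hk'0 : 0 ≤ k' := le_trans hk0 hge
        have hk'n : k'.toNat < row.length := by omega
        have hwmem : w ∈ row := by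
          rw [hwdef, pyGetD_nonneg_eq_getElem row k' hk'0 hk'n]
          exact List.getElem_mem hk'n
        obtain ⟨hw0, hwlt⟩ := row_mem_good adj hG x hx0 hxlt w hwmem
        have hwfresh : PySem.List.pyGetD v w 0 = 0 := hfresh' hlt
        have hwn : w.toNat < v.length := by omega
        have hcnt := count_after_set v w hw0 hwn hwfresh
        have hrowsub := row_mem_good adj hG w hw0 hwlt
        obtain ⟨f1, he1, hq1⟩ := ihf f (by omega) (PySem.List.pySetD v w 1) p w 0 ((x, k' + 1) :: rest)
          (by rw [PySem.List.length_pySetD]; exact hlen) hw0 hwlt (le_refl 0) (by omega)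
        rw [show ((0 : Int).toNat) = 0 from rfl, List.drop_zero] at he1 hq1
        set Rw := refLoop adj (adj.length + 1) (PySem.List.pySetD v w 1) p
          (PySem.List.pyGetD adj w []) with hRwdef
        have hRwc := refLoop_count adj (adj.length + 1) (PySem.List.pyGetD adj w [])
          (PySem.List.pySetD v w 1) p
        have hRwl := refLoop_len adj (adj.length + 1) (PySem.List.pyGetD adj w [])
          (PySem.List.pySetD v w 1) p
        rw [← hRwdef] at hRwc hRwl
        obtain ⟨f2, he2, hq2⟩ := ihf f1 (by omega) Rw.1 (Rw.2 ++ [w]) x (k' + 1) rest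
          (by rw [hRwl, PySem.List.length_pySetD]; exact hlen) hx0 hxlt (by omega) (by omega)
        rw [← hrowdef] at he2 hq2
        have hR'c := refLoop_count adj (adj.length + 1) (row.drop (k' + 1).toNat) Rw.1 (Rw.2 ++ [w])
        have hvcle : v.count 0 ≤ adj.length := by
          have := List.count_le_length (a := (0 : Int)) (l := v)
          omega
        have hdfs : dfsPost adj (adj.length + 1) v p w = (Rw.1, Rw.2 ++ [w]) := by
          rw [dfsPost_succ]
          have hS : refLoop adj adj.length (PySem.List.pySetD v w 1) p (PySem.List.pyGetD adj w [])
              = Rw :=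
            refLoop_fuel adj hG adj.length (adj.length + 1) (PySem.List.pyGetD adj w [])
              (PySem.List.pySetD v w 1) p hrowsub
              (by rw [PySem.List.length_pySetD]; exact hlen) (by omega) (by omega)
          rw [show ((PySem.List.pyGetD adj w []).foldl
            (fun (st : List Int × List Int) u =>
              if PySem.List.pyGetD st.1 u 0 == 0 then dfsPost adj adj.length st.1 st.2 u else st)
            (PySem.List.pySetD v w 1, p)) = refLoop adj adj.length (PySem.List.pySetD v w 1) p
              (PySem.List.pyGetD adj w []) from rfl, hS]
        have hdc : row.drop k'.toNat = row[k'.toNat] :: row.drop (k'.toNat + 1) :=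
          List.drop_eq_getElem_cons hk'n
        have htn : (k' + 1).toNat = k'.toNat + 1 := by omega
        have hReq : refLoop adj (adj.length + 1) v p (row.drop k.toNat)
            = refLoop adj (adj.length + 1) Rw.1 (Rw.2 ++ [w]) (row.drop (k' + 1).toNat) := by
          rw [hfold, hdc, refLoop_cons, if_pos (by
              rw [← pyGetD_nonneg_eq_getElem row k' hk'0 hk'n, ← hwdef]
              simpa using hwfresh),
            ← pyGetD_nonneg_eq_getElem row k' hk'0 hk'n, ← hwdef, hdfs, ← htn]
        rw [hReq]
        exact ⟨f2, he1.trans he2, by omega⟩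
      · -- all remaining neighbors already seen: finish the frame
        rw [if_neg hlt]
        have hdrop : (PySem.List.pyGetD adj x []).drop
            (skipSeen v (PySem.List.pyGetD adj x []) k ((PySem.List.pyGetD adj x []).length + 1)).toNat
            = [] := List.drop_eq_nil_of_le (by omega)
        rw [hfold, hdrop, refLoop_nil]
        exact ⟨f, rfl, by simp⟩
    · -- k already beyond the row: the skip loop is a no-op and the frame finishes
      have hskip : skipSeen v (PySem.List.pyGetD adj x []) k ((PySem.List.pyGetD adj x []).length + 1)
          = k := by
        rw [skipSeen_succ, if_neg (fun hc => absurd hc.1 (by omega))]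
      rw [hskip, if_neg (by omega)]
      have hdrop : (PySem.List.pyGetD adj x []).drop k.toNat = [] :=
        List.drop_eq_nil_of_le (by omega)
      rw [hdrop, refLoop_nil]
      exact ⟨f, rfl, by simp⟩

-- a full root call of the machine equals the recursive reference DFS
theorem iterDFS_root (adj : List (List Int)) (hG : Good adj) (v p : List Int) (s : Int)
    (hlen : v.length = adj.length) (h0 : 0 ≤ s) (hlt : s < (adj.length : Int))
    (hfresh : PySem.List.pyGetD v s 0 = 0) :
    iterDFS adj (2 * adj.length + 1) (PySem.List.pySetD v s 1) p [(s, 0)] =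
      dfsPost adj (adj.length + 1) v p s := by
  have hsn : s.toNat < v.length := by omega
  have hcnt := count_after_set v s h0 hsn hfresh
  have hcle : v.count 0 ≤ adj.length := by
    have := List.count_le_length (a := (0 : Int)) (l := v)
    omega
  obtain ⟨f', he, _hq⟩ := frame_sim adj hG (2 * adj.length + 1) (PySem.List.pySetD v s 1) p s 0 []
    (by rw [PySem.List.length_pySetD]; exact hlen) h0 hlt (le_refl 0) (by omega)
  rw [he, iterDFS_nil, show ((0 : Int).toNat) = 0 from rfl, List.drop_zero]
  have hrows := row_mem_good adj hG s h0 hlt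
  have hS : refLoop adj (adj.length + 1) (PySem.List.pySetD v s 1) p (PySem.List.pyGetD adj s [])
      = refLoop adj adj.length (PySem.List.pySetD v s 1) p (PySem.List.pyGetD adj s []) :=
    refLoop_fuel adj hG (adj.length + 1) adj.length (PySem.List.pyGetD adj s [])
      (PySem.List.pySetD v s 1) p hrows (by rw [PySem.List.length_pySetD]; exact hlen)
      (by omega) (by omega)
  rw [hS, dfsPost_succ]
  rfl

theorem dfsPost_fst (adj : List (List Int)) :
    ∀ (f : Nat) (v p : List Int) (x : Int), (dfsPost adj f v p x).1 = dfsMark adj f v x := by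
  intro f
  induction f with
  | zero => intros; rfl
  | succ f ih =>
    intro v p x
    rw [dfsPost_succ]
    simp only [dfsMark]
    exact foldl_rel (fun (a : List Int × List Int) (b : List Int) => a.1 = b)
      (fun st w => if PySem.List.pyGetD st.1 w 0 == 0 then dfsPost adj f st.1 st.2 w else st)
      (fun u w => if PySem.List.pyGetD u w 0 == 0 then dfsMark adj f u w else u)
      (PySem.List.pyGetD adj x [])
      (PySem.List.pySetD v x 1, p) (PySem.List.pySetD v x 1) rfl
      (fun a a' w ha _ => by
        beta_reduce
        rw [← ha]
        by_cases hg : PySem.List.pyGetD a.1 w 0 == 0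
        · simp only [if_pos hg]
          exact ih a.1 a.2 w
        · simp only [if_neg hg])

-- wraparound normalisation for the machine
theorem normI_zero (n : Nat) : normI n 0 = 0 := by simp [normI]

theorem skipSeen_norm (n : Nat) (v row : List Int)
    (hrow : ∀ w ∈ row, -(n : Int) ≤ w ∧ w < (n : Int)) (hv : v.length = n) :
    ∀ (f : Nat) (k : Int), 0 ≤ k →
      skipSeen v (row.map (normI n)) k f = skipSeen v row k f := by
  intro f
  induction f with
  | zero => intros; rfl
  | succ f ih =>
    intro k hk
    rw [skipSeen_succ, skipSeen_succ, List.length_map]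
    have hget : PySem.List.pyGetD (row.map (normI n)) k 0 = normI n (PySem.List.pyGetD row k 0) := by
      have := PySem.List.pyGetD_map (normI n) row k 0
      rwa [normI_zero] at this
    by_cases hkl : k < (row.length : Int)
    · have hktn : k.toNat < row.length := by omega
      have hwmem : PySem.List.pyGetD row k 0 ∈ row := by
        rw [pyGetD_nonneg_eq_getElem row k hk hktn]
        exact List.getElem_mem hktn
      obtain ⟨hw1, hw2⟩ := hrow _ hwmem
      rw [hget, ← pyGetD_norm n v 0 hv _ hw1 hw2]
      by_cases hcond : k < (row.length : Int) ∧ PySem.List.pyGetD v (PySem.List.pyGetD row k 0) 0 ≠ 0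
      · rw [if_pos hcond, if_pos hcond]
        exact ih (k+1) (by omega)
      · rw [if_neg hcond, if_neg hcond]
    · rw [if_neg (by tauto), if_neg (by tauto)]

theorem iterDFS_len (adj : List (List Int)) :
    ∀ (fuel : Nat) (v p : List Int) (stack : List (Int × Int)),
      (iterDFS adj fuel v p stack).1.length = v.length := by
  intro fuel
  induction fuel with
  | zero => intros; rfl
  | succ f ih =>
    intro v p stack
    cases stack with
    | nil => rfl
    | cons fr rest =>
      obtain ⟨x, k⟩ := fr
      rw [iterDFS_cons]
      split_ifs with h
      · rw [ih, PySem.List.length_pySetD]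
      · exact ih v (p ++ [x]) rest

theorem iterDFS_norm (n : Nat) (adj : List (List Int)) (hl : adj.length = n) (hG : GoodW n adj) :
    ∀ (fuel : Nat) (v p : List Int) (stack : List (Int × Int)),
      v.length = n →
      (∀ fr ∈ stack, (-(n : Int) ≤ fr.1 ∧ fr.1 < (n : Int)) ∧ 0 ≤ fr.2) →
      (∀ e ∈ p, -(n : Int) ≤ e ∧ e < (n : Int)) →
      (iterDFS (normAdj n adj) fuel v (p.map (normI n))
          (stack.map (fun fr => (normI n fr.1, fr.2)))).1 = (iterDFS adj fuel v p stack).1 ∧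
      (iterDFS (normAdj n adj) fuel v (p.map (normI n))
          (stack.map (fun fr => (normI n fr.1, fr.2)))).2
        = (iterDFS adj fuel v p stack).2.map (normI n) ∧
      (∀ e ∈ (iterDFS adj fuel v p stack).2, -(n : Int) ≤ e ∧ e < (n : Int)) := by
  intro fuel
  induction fuel with
  | zero => intro v p stack hv _ hp; exact ⟨rfl, rfl, hp⟩
  | succ f ih =>
    intro v p stack hv hstk hp
    cases stack with
    | nil =>
      rw [List.map_nil, iterDFS_nil, iterDFS_nil]
      exact ⟨rfl, rfl, hp⟩
    | cons fr rest =>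
      obtain ⟨x, k⟩ := fr
      obtain ⟨⟨hx1, hx2⟩, hk0⟩ := hstk (x, k) (by simp)
      have hrest : ∀ fr ∈ rest, ((-(n : Int) ≤ fr.1 ∧ fr.1 < (n : Int)) ∧ 0 ≤ fr.2) :=
        fun fr hfr => hstk fr (by simp [hfr])
      have hrown : PySem.List.pyGetD (normAdj n adj) (normI n x) []
          = (PySem.List.pyGetD adj x []).map (normI n) := by
        rw [← pyGetD_norm n (normAdj n adj) [] (by rw [length_normAdj, hl]) x hx1 hx2, row_norm]
      have hrowrange := row_range n adj hl hG x hx1 hx2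
      have hskip : skipSeen v ((PySem.List.pyGetD adj x []).map (normI n)) k
            (((PySem.List.pyGetD adj x []).map (normI n)).length + 1)
          = skipSeen v (PySem.List.pyGetD adj x []) k ((PySem.List.pyGetD adj x []).length + 1) := by
        rw [List.length_map]
        exact skipSeen_norm n v (PySem.List.pyGetD adj x []) hrowrange hv _ k hk0
      simp only [List.map_cons]
      rw [iterDFS_cons, iterDFS_cons, hrown, hskip, List.length_map]
      set row := PySem.List.pyGetD adj x [] with hrowdef
      set k' := skipSeen v row k (row.length + 1) with hk'def
      by_cases hlt : k' < (row.length : Int)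
      · rw [if_pos hlt, if_pos hlt]
        have hk'0 : 0 ≤ k' := le_trans hk0 (skipSeen_ge v row _ k)
        have hk'n : k'.toNat < row.length := by omega
        have hgetm : PySem.List.pyGetD (row.map (normI n)) k' 0
            = normI n (PySem.List.pyGetD row k' 0) := by
          have := PySem.List.pyGetD_map (normI n) row k' 0
          rwa [normI_zero] at this
        set w := PySem.List.pyGetD row k' 0 with hwdef
        have hwmem : w ∈ row := by
          rw [hwdef, pyGetD_nonneg_eq_getElem row k' hk'0 hk'n]
          exact List.getElem_mem hk'n
        obtain ⟨hw1, hw2⟩ := hrowrange w hwmem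
        rw [hgetm, ← pySetD_norm n v 1 hv w hw1 hw2]
        have := ih (PySem.List.pySetD v w 1) p ((w, 0) :: (x, k' + 1) :: rest)
          (by rw [PySem.List.length_pySetD]; exact hv)
          (by
            intro fr hfr
            simp only [List.mem_cons] at hfr
            rcases hfr with rfl | rfl | hfr
            · exact ⟨⟨hw1, hw2⟩, le_refl 0⟩
            · exact ⟨⟨hx1, hx2⟩, by omega⟩
            · exact hrest fr hfr)
          hp
        simpa only [List.map_cons] using this
      · rw [if_neg hlt, if_neg hlt]
        have hpx : ∀ e ∈ p ++ [x], -(n : Int) ≤ e ∧ e < (n : Int) := by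
          intro e he
          rcases List.mem_append.mp he with he | he
          · exact hp e he
          · rw [List.mem_singleton] at he
            exact he ▸ ⟨hx1, hx2⟩
        have := ih v (p ++ [x]) rest hv hrest hpx
        simpa only [List.map_append, List.map_cons, List.map_nil] using this

theorem normI_range (n : Nat) (w : Int) (h1 : -(n : Int) ≤ w) (h2 : w < (n : Int)) :
    0 ≤ normI n w ∧ normI n w < (n : Int) := by
  unfold normI
  split_ifs <;> constructor <;> omega

-- an empty reverse graph: both programs return 0
theorem spec_empty (adj_array adj_reverse : List (List Int)) (h : adj_reverse.length = 0) :
    number_of_strongly_connected_components adj_array adj_reverse =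
      number_of_strongly_connected_components_alt adj_array adj_reverse := by
  have hnil : adj_reverse = [] := List.length_eq_zero_iff.mp h
  subst hnil
  have hs : ∀ key : Int → Int, PySem.List.sorted ([] : List Int) key true = [] := by
    intro key
    exact List.Perm.eq_nil (PySem.List.sorted_perm _ _ _)
  unfold number_of_strongly_connected_components topological_sort
    number_of_strongly_connected_components_alt
  simp [PySem.List.pyRange_one_eq_nil (le_refl (0 : Int)), hs]

-- the second pass of the recursive reference is unchanged by normalising the forward graph
theorem nscc_normA (adj_array adj_reverse : List (List Int)) (hGr : Good adj_reverse)
    (hW : GoodW adj_array.length adj_array) (hle : adj_reverse.length ≤ adj_array.length) :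
    nsccRec adj_array adj_reverse = nsccRec (normAdj adj_array.length adj_array) adj_reverse := by
  obtain ⟨used, order, post, clock, _hA, hB, _hu, _ho, _hc, _hn, hbnds, _hcp, _hpw, _hbl⟩ :=
    top_loop adj_reverse hGr adj_reverse.length (le_refl _)
  unfold nsccRec
  simp only [length_normAdj]
  rw [hB]
  have h2 : (used, post).2.reverse.foldl
      (fun (st : List Int × Int) i =>
        if PySem.List.pyGetD st.1 i 0 == 0 then (dfsMark adj_array (adj_array.length + 1) st.1 i, st.2 + 1) else st)
      (List.replicate adj_array.length 0, 0) =
      (used, post).2.reverse.foldl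
      (fun (st : List Int × Int) i =>
        if PySem.List.pyGetD st.1 i 0 == 0 then
          (dfsMark (normAdj adj_array.length adj_array) (adj_array.length + 1) st.1 i, st.2 + 1) else st)
      (List.replicate adj_array.length 0, 0) := by
    apply foldl_congr_inv (fun st : List Int × Int => st.1.length = adj_array.length)
      _ _ _ _ (by simp)
    intro st s hst hs
    rw [List.mem_reverse] at hs
    obtain ⟨hs0, hsr⟩ := hbnds s hs
    have hsa : s < (adj_array.length : Int) := by omega
    by_cases hg : PySem.List.pyGetD st.1 s 0 == 0
    · have heq : dfsMark adj_array (adj_array.length + 1) st.1 s =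
          dfsMark (normAdj adj_array.length adj_array) (adj_array.length + 1) st.1 s := by
        have := dfsMark_norm adj_array.length adj_array rfl hW (adj_array.length + 1) st.1 s hst
          (by omega) hsa
        rwa [normI_of_nonneg _ s hs0] at this
      constructor
      · simp only [if_pos hg, heq]
      · simp only [if_pos hg]
        exact (dfsMark_len _ _ _ _).trans hst
    · exact ⟨by simp only [if_neg hg], by simp only [if_neg hg]; exact hst⟩
  rw [h2]

-- pass-for-pass coupling of the recursive reference (on the normalised forward graph)
-- with B's stack machine, valid-nonnegative-reverse-edges case
theorem core_nonneg (adj_array adj_reverse : List (List Int)) (hGr : Good adj_reverse)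
    (hW : GoodW adj_array.length adj_array) (hle : adj_reverse.length ≤ adj_array.length) :
    nsccRec (normAdj adj_array.length adj_array) adj_reverse =
      number_of_strongly_connected_components_alt adj_array adj_reverse := by
  obtain ⟨used, order, post, clock, _hA, hB, _hu, _ho, _hc, _hn, hbnds, _hcp, _hpw, _hbl⟩ :=
    top_loop adj_reverse hGr adj_reverse.length (le_refl _)
  have hGB : Good (normAdj adj_array.length adj_array) := good_normAdj _ _ hW rfl
  have hpass1 : ((PySem.List.pyRange 0 (adj_reverse.length : Int)).foldl
      (fun (st : List Int × List Int) s =>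
        if PySem.List.pyGetD st.1 s 0 == 0 then
          iterDFS adj_reverse (2 * adj_reverse.length + 1) (PySem.List.pySetD st.1 s 1) st.2 [(s, 0)]
        else st)
      (List.replicate adj_reverse.length 0, [])) =
      ((PySem.List.pyRange 0 (adj_reverse.length : Int)).foldl
      (fun (st : List Int × List Int) i =>
        if PySem.List.pyGetD st.1 i 0 == 0 then
          dfsPost adj_reverse (adj_reverse.length + 1) st.1 st.2 i else st)
      (List.replicate adj_reverse.length 0, [])) := by
    apply foldl_congr_inv (fun st : List Int × List Int => st.1.length = adj_reverse.length)
      _ _ _ _ (by simp)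
    intro st i hst hi
    obtain ⟨h0, hltr⟩ := PySem.List.mem_pyRange_one.mp hi
    by_cases hg : PySem.List.pyGetD st.1 i 0 == 0
    · have hgv : PySem.List.pyGetD st.1 i 0 = 0 := by simpa using hg
      have hroot := iterDFS_root adj_reverse hGr st.1 st.2 i hst h0 hltr hgv
      exact ⟨by simp only [if_pos hg]; exact hroot,
        by simp only [if_pos hg]; rw [hroot]; exact (dfsPost_len _ _ _ _ _).trans hst⟩
    · exact ⟨by simp only [if_neg hg], by simp only [if_neg hg]; exact hst⟩
  have hpass2 : ∀ (l : List Int), (∀ s ∈ l, 0 ≤ s ∧ s < (adj_reverse.length : Int)) →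
      (l.foldl (fun (st : List Int × Int) s =>
          if PySem.List.pyGetD st.1 s 0 == 0 then
            (dfsMark (normAdj adj_array.length adj_array) (adj_array.length + 1) st.1 s, st.2 + 1)
          else st)
        (List.replicate adj_array.length 0, 0)) =
      (l.foldl (fun (st : List Int × Int) s =>
          if PySem.List.pyGetD st.1 s 0 == 0 then
            ((iterDFS adj_array (2 * adj_array.length + 1) (PySem.List.pySetD st.1 s 1) [] [(s, 0)]).1,
              st.2 + 1)
          else st)
        (List.replicate adj_array.length 0, 0)) := by
    intro l hl
    apply foldl_congr_inv (fun st : List Int × Int => st.1.length = adj_array.length)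
      _ _ _ _ (by simp)
    intro st s hst hs
    obtain ⟨hs0, hsr⟩ := hl s hs
    have hsa : s < (adj_array.length : Int) := by omega
    by_cases hg : PySem.List.pyGetD st.1 s 0 == 0
    · have hgv : PySem.List.pyGetD st.1 s 0 = 0 := by simpa using hg
      have hnorm := (iterDFS_norm adj_array.length adj_array rfl hW
        (2 * adj_array.length + 1) (PySem.List.pySetD st.1 s 1) [] [(s, 0)]
        (by rw [PySem.List.length_pySetD]; exact hst)
        (by
          intro fr hfr
          rw [List.mem_singleton] at hfr
          subst hfr
          exact ⟨⟨by omega, hsa⟩, le_refl 0⟩)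
        (fun e he => absurd he (List.not_mem_nil))).1
      simp only [List.map_cons, List.map_nil, normI_of_nonneg _ s hs0] at hnorm
      have hroot := iterDFS_root (normAdj adj_array.length adj_array) hGB st.1 [] s
        (by rw [length_normAdj]; exact hst) hs0 (by rw [length_normAdj]; exact hsa) hgv
      rw [length_normAdj] at hroot
      have heq : dfsMark (normAdj adj_array.length adj_array) (adj_array.length + 1) st.1 s =
          (iterDFS adj_array (2 * adj_array.length + 1) (PySem.List.pySetD st.1 s 1) [] [(s, 0)]).1 := by
        rw [← hnorm, hroot, dfsPost_fst]
      exact ⟨by simp only [if_pos hg, heq],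
        by simp only [if_pos hg]; exact (dfsMark_len _ _ _ _).trans hst⟩
    · exact ⟨by simp only [if_neg hg], by simp only [if_neg hg]; exact hst⟩
  unfold nsccRec number_of_strongly_connected_components_alt
  simp only [length_normAdj]
  rw [hpass1, hB]
  rw [hpass2 post.reverse (by intro s hs; exact hbnds s (List.mem_reverse.mp hs))]

-- same coupling for the equal-lengths wraparound case (both graphs normalised)
theorem core_wrap (adj_array adj_reverse : List (List Int))
    (hlen : adj_reverse.length = adj_array.length)
    (hWr : GoodW adj_reverse.length adj_reverse)
    (hWa : GoodW adj_reverse.length adj_array) :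
    nsccRec (normAdj adj_reverse.length adj_array) (normAdj adj_reverse.length adj_reverse) =
      number_of_strongly_connected_components_alt adj_array adj_reverse := by
  have hNa : adj_array.length = adj_reverse.length := hlen.symm
  have hGr' : Good (normAdj adj_reverse.length adj_reverse) := good_normAdj _ _ hWr rfl
  have hGa' : Good (normAdj adj_reverse.length adj_array) := good_normAdj _ _ hWa hNa
  obtain ⟨used, order, post, clock, _hA, hB, _hu, _ho, _hc, _hn, hbnds, _hcp, _hpw, _hbl⟩ :=
    top_loop (normAdj adj_reverse.length adj_reverse) hGr'
      (normAdj adj_reverse.length adj_reverse).length (le_refl _)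
  rw [length_normAdj] at hB hbnds
  -- pass 1: machine on the raw reverse graph versus the reference on the normalised one
  have hrel := foldl_rel
    (fun (st : List Int × List Int) (st' : List Int × List Int) =>
      st'.1 = st.1 ∧ st'.2 = st.2.map (normI adj_reverse.length) ∧
        st.1.length = adj_reverse.length ∧
        (∀ e ∈ st.2, -(adj_reverse.length : Int) ≤ e ∧ e < (adj_reverse.length : Int)))
    (fun (st : List Int × List Int) s =>
      if PySem.List.pyGetD st.1 s 0 == 0 then
        iterDFS adj_reverse (2 * adj_reverse.length + 1) (PySem.List.pySetD st.1 s 1) st.2 [(s, 0)]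
      else st)
    (fun (st : List Int × List Int) i =>
      if PySem.List.pyGetD st.1 i 0 == 0 then
        dfsPost (normAdj adj_reverse.length adj_reverse) (adj_reverse.length + 1) st.1 st.2 i
      else st)
    (PySem.List.pyRange 0 (adj_reverse.length : Int))
    (List.replicate adj_reverse.length 0, ([] : List Int))
    (List.replicate adj_reverse.length 0, ([] : List Int))
    ⟨rfl, rfl, List.length_replicate, by simp⟩
    (fun a a' s ha hs => by
      obtain ⟨h0, hltr⟩ := PySem.List.mem_pyRange_one.mp hs
      obtain ⟨ha1, ha2, ha3, ha4⟩ := ha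
      beta_reduce
      rw [ha1]
      by_cases hg : PySem.List.pyGetD a.1 s 0 == 0
      · have hgv : PySem.List.pyGetD a.1 s 0 = 0 := by simpa using hg
        rw [if_pos hg, if_pos hg]
        have hnorm := iterDFS_norm adj_reverse.length adj_reverse rfl hWr
          (2 * adj_reverse.length + 1) (PySem.List.pySetD a.1 s 1) a.2 [(s, 0)]
          (by rw [PySem.List.length_pySetD]; exact ha3)
          (by
            intro fr hfr
            rw [List.mem_singleton] at hfr
            subst hfr
            exact ⟨⟨by omega, hltr⟩, le_refl 0⟩)
          ha4
        simp only [List.map_cons, List.map_nil, normI_of_nonneg _ s h0] at hnorm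
        obtain ⟨hn1, hn2, hn3⟩ := hnorm
        have hroot := iterDFS_root (normAdj adj_reverse.length adj_reverse) hGr' a.1
          (a.2.map (normI adj_reverse.length)) s
          (by rw [length_normAdj]; exact ha3) h0 (by rw [length_normAdj]; exact hltr) hgv
        rw [length_normAdj] at hroot
        rw [ha2, ← hroot]
        exact ⟨hn1, hn2,
          (iterDFS_len _ _ _ _ _).trans (by rw [PySem.List.length_pySetD]; exact ha3), hn3⟩
      · rw [if_neg hg, if_neg hg]
        exact ⟨ha1, ha2, ha3, ha4⟩)
  rw [hB] at hrel
  obtain ⟨hr1, hr2, hr3, hr4⟩ := hrel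
  unfold nsccRec number_of_strongly_connected_components_alt
  simp only [length_normAdj]
  rw [hB, hr2]
  -- pass 2: fold the normalisation of the roots into the step function
  rw [show ((List.foldl
        (fun (st : List Int × List Int) s =>
          if PySem.List.pyGetD st.1 s 0 == 0 then
            iterDFS adj_reverse (2 * adj_reverse.length + 1) (PySem.List.pySetD st.1 s 1) st.2 [(s, 0)]
          else st)
        (List.replicate adj_reverse.length 0, [])
        (PySem.List.pyRange 0 (adj_reverse.length : Int))).2.map
          (normI adj_reverse.length)).reverse =
      (List.foldl
        (fun (st : List Int × List Int) s =>
          if PySem.List.pyGetD st.1 s 0 == 0 then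
            iterDFS adj_reverse (2 * adj_reverse.length + 1) (PySem.List.pySetD st.1 s 1) st.2 [(s, 0)]
          else st)
        (List.replicate adj_reverse.length 0, [])
        (PySem.List.pyRange 0 (adj_reverse.length : Int))).2.reverse.map
          (normI adj_reverse.length) from by rw [List.map_reverse], List.foldl_map]
  apply congrArg (fun st : List Int × Int => st.2)
  apply (foldl_congr_inv (fun st : List Int × Int => st.1.length = adj_array.length)
    _ _ _ _ (by simp) ?_).symm
  intro st s hst hs
  rw [List.mem_reverse] at hs
  obtain ⟨hs1, hs2⟩ := hr4 s hs
  obtain ⟨hns0, hnslt⟩ := normI_range adj_reverse.length s hs1 hs2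
  have hstN : st.1.length = adj_reverse.length := hst.trans hNa
  have hgn : PySem.List.pyGetD st.1 s 0 = PySem.List.pyGetD st.1 (normI adj_reverse.length s) 0 :=
    pyGetD_norm adj_reverse.length st.1 0 hstN s hs1 hs2
  by_cases hg : PySem.List.pyGetD st.1 s 0 == 0
  · have hgb : (PySem.List.pyGetD st.1 (normI adj_reverse.length s) 0 == 0) = true := by
      rw [← hgn]; exact hg
    have hgv : PySem.List.pyGetD st.1 (normI adj_reverse.length s) 0 = 0 := by simpa using hgb
    have hset : PySem.List.pySetD st.1 s 1 =
        PySem.List.pySetD st.1 (normI adj_reverse.length s) 1 :=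
      pySetD_norm adj_reverse.length st.1 1 hstN s hs1 hs2
    have hnorm := (iterDFS_norm adj_reverse.length adj_array hNa hWa
      (2 * adj_array.length + 1) (PySem.List.pySetD st.1 s 1) [] [(s, 0)]
      (by rw [PySem.List.length_pySetD]; exact hstN)
      (by
        intro fr hfr
        rw [List.mem_singleton] at hfr
        subst hfr
        exact ⟨⟨hs1, hs2⟩, le_refl 0⟩)
      (fun e he => absurd he (List.not_mem_nil))).1
    simp only [List.map_cons, List.map_nil] at hnorm
    have hroot := iterDFS_root (normAdj adj_reverse.length adj_array) hGa' st.1 []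
      (normI adj_reverse.length s)
      (by rw [length_normAdj]; exact hst) hns0
      (by rw [length_normAdj]; exact_mod_cast (by omega : normI adj_reverse.length s < (adj_array.length : Int)))
      hgv
    rw [length_normAdj] at hroot
    have heq : (iterDFS adj_array (2 * adj_array.length + 1) (PySem.List.pySetD st.1 s 1) []
        [(s, 0)]).1 =
        dfsMark (normAdj adj_reverse.length adj_array) (adj_array.length + 1) st.1
          (normI adj_reverse.length s) := by
      rw [← hnorm, hset, hroot, dfsPost_fst]
    constructor
    · simp only [if_pos hg, if_pos hgb, heq]
    · simp only [if_pos hg]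
      rw [heq]
      exact (dfsMark_len _ _ _ _).trans hst
  · have hgb : (PySem.List.pyGetD st.1 (normI adj_reverse.length s) 0 == 0) = false := by
      rw [← hgn]; simpa using hg
    exact ⟨by simp only [if_neg hg]; rw [hgb]; simp, by simp only [if_neg hg]; exact hst⟩

-- A's result is unchanged by normalising both graphs (equal-lengths wraparound case)
theorem A_wrap (adj_array adj_reverse : List (List Int))
    (hlen : adj_reverse.length = adj_array.length)
    (hGr : ∀ row ∈ adj_reverse, ∀ w ∈ row, -(adj_reverse.length : Int) ≤ w ∧ w < (adj_reverse.length : Int))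
    (hGa : ∀ row ∈ adj_array, ∀ w ∈ row, -(adj_array.length : Int) ≤ w ∧ w < (adj_array.length : Int)) :
    number_of_strongly_connected_components adj_array adj_reverse =
      number_of_strongly_connected_components (normAdj adj_reverse.length adj_array)
        (normAdj adj_reverse.length adj_reverse) := by
  set N := adj_reverse.length with hN
  have haN : adj_array.length = N := hlen.symm
  have hGr' : GoodW N adj_reverse := hGr
  have hGa' : GoodW N adj_array := by
    intro row hr w hw
    obtain ⟨h1, h2⟩ := hGa row hr w hw
    constructor <;> omega
  have hfold1 : (PySem.List.pyRange 0 (N : Int)).foldl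
      (fun (st : List Int × List Int × Int) i =>
        if PySem.List.pyGetD st.1 i 0 == 0 then dfsW adj_reverse (N+1) st.1 st.2.1 i st.2.2 else st)
      (List.replicate N 0, List.replicate N 0, 1) =
    (PySem.List.pyRange 0 (N : Int)).foldl
      (fun (st : List Int × List Int × Int) i =>
        if PySem.List.pyGetD st.1 i 0 == 0
          then dfsW (normAdj N adj_reverse) (N+1) st.1 st.2.1 i st.2.2 else st)
      (List.replicate N 0, List.replicate N 0, 1) := by
    apply foldl_congr_inv (fun st : List Int × List Int × Int => st.1.length = N ∧ st.2.1.length = N)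
      _ _ _ _ ⟨List.length_replicate, List.length_replicate⟩
    intro st i hst hi
    obtain ⟨h0, hlt⟩ := PySem.List.mem_pyRange_one.mp hi
    constructor
    · by_cases hg : PySem.List.pyGetD st.1 i 0 == 0
      · simp only [if_pos hg]
        rw [dfsW_norm N adj_reverse rfl hGr' (N+1) st.1 st.2.1 i st.2.2 hst.1 hst.2 (by omega) hlt,
          normI_of_nonneg N i h0]
      · simp only [if_neg hg]
    · by_cases hg : PySem.List.pyGetD st.1 i 0 == 0
      · simp only [if_pos hg]
        exact ⟨(dfsW_len adj_reverse (N+1) st.1 st.2.1 i st.2.2).1.trans hst.1,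
          (dfsW_len adj_reverse (N+1) st.1 st.2.1 i st.2.2).2.trans hst.2⟩
      · simp only [if_neg hg]; exact hst
  have hTS : topological_sort adj_reverse = topological_sort (normAdj N adj_reverse) := by
    unfold topological_sort
    simp only [length_normAdj, ← hN]
    rw [hfold1]
  have hidx : ∀ i ∈ topological_sort adj_reverse, 0 ≤ i ∧ i < (N : Int) := by
    unfold topological_sort
    intro i hi
    rw [PySem.List.mem_sorted, PySem.List.mem_pyRange_one] at hi
    exact ⟨hi.1, hi.2⟩
  have hfold2 : ∀ l : List Int, (∀ i ∈ l, 0 ≤ i ∧ i < (N : Int)) →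
      (l.foldl (fun (st : List Int × Int) i =>
          if PySem.List.pyGetD st.1 i 0 == 0
            then (dfsA adj_array (adj_array.length+1) st.1 i, st.2 + 1) else st)
        (List.replicate adj_array.length 0, 0)) =
      (l.foldl (fun (st : List Int × Int) i =>
          if PySem.List.pyGetD st.1 i 0 == 0
            then (dfsA (normAdj N adj_array) (adj_array.length+1) st.1 i, st.2 + 1) else st)
        (List.replicate adj_array.length 0, 0)) := by
    intro l hl
    apply foldl_congr_inv (fun st : List Int × Int => st.1.length = N) _ _ _ _
      (by simp [haN])
    intro st i hst hi
    obtain ⟨h0, hlt⟩ := hl i hi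
    constructor
    · by_cases hg : PySem.List.pyGetD st.1 i 0 == 0
      · simp only [if_pos hg]
        rw [dfsA_eq_dfsMark, dfsA_eq_dfsMark,
          dfsMark_norm N adj_array haN hGa' (adj_array.length+1) st.1 i hst (by omega) hlt,
          normI_of_nonneg N i h0]
      · simp only [if_neg hg]
    · by_cases hg : PySem.List.pyGetD st.1 i 0 == 0
      · simp only [if_pos hg]
        show (dfsA adj_array (adj_array.length+1) st.1 i).length = N
        rw [dfsA_eq_dfsMark]
        exact (dfsMark_len adj_array (adj_array.length+1) st.1 i).trans hst
      · simp only [if_neg hg]; exact hst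
  unfold number_of_strongly_connected_components
  rw [← hTS]
  simp only [length_normAdj]
  rw [hfold2 (topological_sort adj_reverse) hidx]

-- ===== VERDICT (by name: the statement is the Claim_ definition above) =====
theorem number_of_strongly_connected_components_spec : Claim_equal_number_of_strongly_connected_components := by
  intro adj_array adj_reverse _hDom hPre
  show number_of_strongly_connected_components adj_array adj_reverse =
    number_of_strongly_connected_components_alt adj_array adj_reverse
  rcases hPre with ⟨hle, hGr, hA⟩ | ⟨hlen, hGr, hGa⟩
  · rcases hA with h0 | hWrap
    · exact spec_empty adj_array adj_reverse h0
    · have hW : GoodW adj_array.length adj_array := hWrap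
      calc number_of_strongly_connected_components adj_array adj_reverse
          = nsccRec adj_array adj_reverse := AB_core adj_array adj_reverse hGr
        _ = nsccRec (normAdj adj_array.length adj_array) adj_reverse :=
            nscc_normA adj_array adj_reverse hGr hW hle
        _ = number_of_strongly_connected_components_alt adj_array adj_reverse :=
            core_nonneg adj_array adj_reverse hGr hW hle
  · have hWr : GoodW adj_reverse.length adj_reverse := hGr
    have hc : (adj_reverse.length : Int) = (adj_array.length : Int) := by
      exact_mod_cast congrArg Nat.cast hlen
    have hWa : GoodW adj_reverse.length adj_array := by
      intro row hr w hw
      obtain ⟨h1, h2⟩ := hGa row hr w hw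
      constructor <;> omega
    calc number_of_strongly_connected_components adj_array adj_reverse
        = number_of_strongly_connected_components (normAdj adj_reverse.length adj_array)
            (normAdj adj_reverse.length adj_reverse) := A_wrap adj_array adj_reverse hlen hGr hGa
      _ = nsccRec (normAdj adj_reverse.length adj_array) (normAdj adj_reverse.length adj_reverse) :=
          AB_core _ _ (good_normAdj _ _ hWr rfl)
      _ = number_of_strongly_connected_components_alt adj_array adj_reverse :=
          core_wrap adj_array adj_reverse hlen hWr hWa
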